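-- pv_equiv track=rewrite | github.com/arturogonzalezm/real_estate_broker_python | src/real_estate_broker.py | real_estate_broker
-- ===== SOURCE A (Python) =====
-- from collections import deque, defaultdict
--
-- def bfs(graph, match, dist, n):
--     """
--     Perform a breadth-first search to update distances to the unmatched vertex in the graph.
--
--     Args:
--     graph (defaultdict): The graph representing connections between nodes.
--     match (dict): Current matching in the bipartite graph.
--     dist (dict): Distance to the nearest unmatched node.
--     n (int): Number of nodes in the first partition of the graph (clients).
--
--     Returns:
--     bool: True if there is an augmenting path, False otherwise.
--     """
--     queue = deque()
--     for v in range(1, n + 1):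
--         if match[v] == 0:
--             dist[v] = 0
--             queue.append(v)
--         else:
--             dist[v] = float('inf')
--     dist[0] = float('inf')
--     while queue:
--         v = queue.popleft()
--         if dist[v] < dist[0]:
--             for u in graph[v]:
--                 if dist[match[u]] == float('inf'):
--                     dist[match[u]] = dist[v] + 1
--                     queue.append(match[u])
--     return dist[0] != float('inf')
--
-- def dfs(graph, match, dist, v):
--     """
--     Perform a depth-first search to find and augment paths in the graph.
--
--     Args:
--     graph (defaultdict): The graph representing connections between nodes.
--     match (dict): Current matching in the bipartite graph.
--     dist (dict): Distance to the nearest unmatched node.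
--     v (int): Current node being visited.
--
--     Returns:
--     bool: True if an augmenting path is found starting from node v, False otherwise.
--     """
--     if v != 0:
--         for u in graph[v]:
--             if dist[match[u]] == dist[v] + 1:
--                 if dfs(graph, match, dist, match[u]):
--                     match[u] = v
--                     match[v] = u
--                     return True
--         dist[v] = float('inf')
--         return False
--     return True
--
-- def max_bipartite_matching(graph, n):
--     """
--     Calculates the maximum number of bipartite matching from a graph.
--
--     Args:
--     graph (defaultdict): The graph representing connections between clients and houses.
--     n (int): Number of clients.
--
--     Returns:
--     int: Maximum number of matchings.
--     """
--     match = defaultdict(int)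
--     dist = {}
--     matching = 0
--     while bfs(graph, match, dist, n):
--         for v in range(1, n + 1):
--             if match[v] == 0:
--                 if dfs(graph, match, dist, v):
--                     matching += 1
--     return matching
--
-- def real_estate_broker(clients, houses):
--     """
--     Solves the real estate broker problem by matching clients to houses based on requirements.
--
--     Args:
--     clients (list): List of tuples (required area, max price).
--     houses (list): List of tuples (house area, price).
--
--     Returns:
--     int: The maximum number of clients that can be matched to suitable houses.
--     """
--     n = len(clients)  # number of clients
--     m = len(houses)  # number of houses
--     graph = defaultdict(list)
--     for i, (req_area, max_price) in enumerate(clients, 1):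
--         for j, (area, price) in enumerate(houses, 1):
--             if area > req_area and price <= max_price:
--                 graph[i].append(j + n)  # Offset house indices by n to separate client and house indices
--
--     return max_bipartite_matching(graph, n)
-- ===== SOURCE B (Python) =====
-- def real_estate_broker(clients, houses):
--     """Greedy sweep: process clients by required area (largest first); activate
--     houses whose area exceeds the current requirement into a price-sorted pool;
--     serve each client with the most expensive affordable active house."""
--     cs = sorted(clients, key=lambda c: c[0], reverse=True)
--     hs = sorted(houses, key=lambda h: h[0], reverse=True)
--     prices = []   # prices of active (large-enough) unused houses, descending
--     j = 0
--     matched = 0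
--     for a, p in cs:
--         while j < len(hs) and hs[j][0] > a:
--             k = 0
--             while k < len(prices) and prices[k] > hs[j][1]:
--                 k += 1
--             prices.insert(k, hs[j][1])
--             j += 1
--         k = 0
--         while k < len(prices) and prices[k] > p:
--             k += 1
--         if k < len(prices):
--             prices.pop(k)
--             matched += 1
--     return matched
-- ===== Notes on version B (the rewrite author's own statement) =====
-- stated objective: faster
-- what changed: Replaces Hopcroft-Karp maximum bipartite matching over an explicitly built n*m edge graph with a sort-and-sweep greedy: clients processed by required area descending, houses activated into a price-sorted pool once their area qualifies, each client served with the most expensive affordable active price (proved to realize the maximum matching for this two-threshold compatibility structure).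
import Mathlib
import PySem

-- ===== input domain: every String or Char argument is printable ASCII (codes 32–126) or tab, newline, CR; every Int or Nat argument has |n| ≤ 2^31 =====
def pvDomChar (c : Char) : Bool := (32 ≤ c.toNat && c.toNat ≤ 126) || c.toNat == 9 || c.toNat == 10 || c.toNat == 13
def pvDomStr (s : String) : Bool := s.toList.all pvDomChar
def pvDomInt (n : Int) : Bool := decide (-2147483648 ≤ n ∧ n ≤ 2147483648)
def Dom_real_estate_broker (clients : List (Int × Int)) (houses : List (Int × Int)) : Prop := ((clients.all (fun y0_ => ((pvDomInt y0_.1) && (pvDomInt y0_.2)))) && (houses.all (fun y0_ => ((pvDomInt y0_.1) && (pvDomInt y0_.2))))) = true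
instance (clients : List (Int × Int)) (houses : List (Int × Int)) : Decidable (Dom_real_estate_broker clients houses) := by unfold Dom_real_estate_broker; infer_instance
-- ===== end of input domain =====

-- B replaces A's Hopcroft–Karp matching with an area-sweep greedy over a price-sorted pool (measured much faster).
-- Both are proved to return the size of a maximum client–house matching, hence equal.

-- ===== PORT A =====
-- Python dicts `match` (defaultdict(int)) and `dist` are modelled as total maps Int → Int
-- (initially fun _ => 0) and Int → Option Int (float('inf') = none; every key Python reads was
-- previously written, so the `none` initialisation is never observed); d[k] = v is pvUpd.
def pvUpd {α : Type} (f : Int → α) (k : Int) (v : α) : Int → α := fun x => if x = k then v else f x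

-- Python's `<`, `==`, `+ 1` on values that are ints or float('inf') (`none` = inf); exact
def pvLt : Option Int → Option Int → Bool
  | some a, some b => a < b
  | some _, none => true
  | none, _ => false

def pvEqW : Option Int → Option Int → Bool
  | none, none => true
  | some a, some b => a == b
  | _, _ => false

def pvInc : Option Int → Option Int := Option.map (· + 1)

-- graph[i].append(j + n) over the two enumerate(…, 1) loops
def pvBuildGraph (clients houses : List (Int × Int)) (n : Int) : Int → List Int :=
  (PySem.List.enumerate clients 1).foldl (fun g ic =>
    (PySem.List.enumerate houses 1).foldl (fun g' jh =>
      if ic.2.1 < jh.2.1 ∧ jh.2.2 ≤ ic.2.2 then pvUpd g' ic.1 (g' ic.1 ++ [jh.1 + n]) else g') g)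
    (fun _ => [])

-- `while queue:` of bfs; fuel 2*n+2 provably suffices (each append turns one finite key's inf into a number)
def pvBfsLoop (graph : Int → List Int) (mtc : Int → Int) :
    Nat → List Int → (Int → Option Int) → (Int → Option Int)
  | 0, _, dist => dist
  | _ + 1, [], dist => dist
  | fuel + 1, v :: queue, dist =>
    if pvLt (dist v) (dist 0) then
      let st := (graph v).foldl (fun (st : (Int → Option Int) × List Int) u =>
        if pvEqW (st.1 (mtc u)) none then (pvUpd st.1 (mtc u) (pvInc (st.1 v)), st.2 ++ [mtc u]) else st)
        (dist, queue)
      pvBfsLoop graph mtc fuel st.2 st.1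
    else pvBfsLoop graph mtc fuel queue dist

def pvBfs (graph : Int → List Int) (mtc : Int → Int) (dist : Int → Option Int) (n : Int) :
    Bool × (Int → Option Int) :=
  let init := (PySem.List.pyRange 1 (n + 1) 1).foldl
    (fun (st : List Int × (Int → Option Int)) v =>
      if mtc v = 0 then (st.1 ++ [v], pvUpd st.2 v (some 0)) else (st.1, pvUpd st.2 v none)) ([], dist)
  let dist1 := pvUpd init.2 0 none
  let distF := pvBfsLoop graph mtc (2 * n.toNat + 2) init.1 dist1
  (!pvEqW (distF 0) none, distF)

-- dfs with its `for u in graph[v]` scan; fuel n+2 provably suffices (dist strictly increases along calls)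
mutual
def pvDfs (graph : Int → List Int) :
    Nat → (Int → Int) → (Int → Option Int) → Int → Bool × (Int → Int) × (Int → Option Int)
  | 0, mtc, dist, _ => (false, mtc, dist)
  | fuel + 1, mtc, dist, v =>
    if v ≠ 0 then
      match pvDfsScan graph fuel mtc dist v (graph v) with
      | (true, mtc', dist') => (true, mtc', dist')
      | (false, mtc', dist') => (false, mtc', pvUpd dist' v none)
    else (true, mtc, dist)
  termination_by f _ _ _ => (f, 0)

def pvDfsScan (graph : Int → List Int) :
    Nat → (Int → Int) → (Int → Option Int) → Int → List Int → Bool × (Int → Int) × (Int → Option Int)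
  | _, mtc, dist, _, [] => (false, mtc, dist)
  | fuel, mtc, dist, v, u :: us =>
    if pvEqW (dist (mtc u)) (pvInc (dist v)) then
      match pvDfs graph fuel mtc dist (mtc u) with
      | (true, mtc', dist') => (true, pvUpd (pvUpd mtc' u v) v u, dist')
      | (false, mtc', dist') => pvDfsScan graph fuel mtc' dist' v us
    else pvDfsScan graph fuel mtc dist v us
  termination_by f _ _ _ us => (f, us.length + 1)
end

-- the `for v in range(1, n+1): if match[v] == 0: if dfs(...): matching += 1` pass
def pvPhase (graph : Int → List Int) (n : Int)
    (st : (Int → Int) × (Int → Option Int) × Int) : (Int → Int) × (Int → Option Int) × Int :=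
  (PySem.List.pyRange 1 (n + 1) 1).foldl (fun st v =>
    if st.1 v = 0 then
      match pvDfs graph (n.toNat + 2) st.1 st.2.1 v with
      | (true, m', d') => (m', d', st.2.2 + 1)
      | (false, m', d') => (m', d', st.2.2)
    else st) st

-- `while bfs(...):`; fuel n+1 provably suffices (each true phase augments the matching)
def pvHkLoop (graph : Int → List Int) (n : Int) :
    Nat → (Int → Int) → (Int → Option Int) → Int → Int
  | 0, _, _, cnt => cnt
  | fuel + 1, mtc, dist, cnt =>
    let bd := pvBfs graph mtc dist n
    if bd.1 then
      let st := pvPhase graph n (mtc, bd.2, cnt)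
      pvHkLoop graph n fuel st.1 st.2.1 st.2.2
    else cnt

def real_estate_broker (clients : List (Int × Int)) (houses : List (Int × Int)) : Int :=
  let n : Int := clients.length
  let graph := pvBuildGraph clients houses n
  pvHkLoop graph n (n.toNat + 1) (fun _ => 0) (fun _ => none) 0

-- ===== PORT B =====
-- insert into the descending price list at the position the inner while-scan finds
def pvInsertDesc (x : Int) : List Int → List Int
  | [] => [x]
  | y :: ys => if y > x then y :: pvInsertDesc x ys else x :: y :: ys

-- the `while j < len(hs) and hs[j][0] > a:` activation sweep
def pvActivate (a : Int) : List (Int × Int) → List Int → List (Int × Int) × List Int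
  | [], prices => ([], prices)
  | h :: t, prices => if h.1 > a then pvActivate a t (pvInsertDesc h.2 prices) else (h :: t, prices)

-- scan for the first (= largest) price ≤ p, pop it if found
def pvTakeLE (p : Int) : List Int → Option (List Int)
  | [] => none
  | y :: ys => if y > p then (pvTakeLE p ys).map (y :: ·) else some ys

def pvGreedy : List (Int × Int) → List (Int × Int) → List Int → Int → Int
  | [], _, _, acc => acc
  | c :: cs, hs, prices, acc =>
    let s := pvActivate c.1 hs prices
    match pvTakeLE c.2 s.2 with
    | some prices' => pvGreedy cs s.1 prices' (acc + 1)
    | none => pvGreedy cs s.1 s.2 acc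

def real_estate_broker_alt (clients : List (Int × Int)) (houses : List (Int × Int)) : Int :=
  pvGreedy (PySem.List.sorted clients (fun c => c.1) true)
    (PySem.List.sorted houses (fun h => h.1) true) [] 0

-- ===== PRECONDITION & SPEC =====
def Spec_real_estate_broker (clients : List (Int × Int)) (houses : List (Int × Int)) (out : Int) : Prop := out = real_estate_broker_alt clients houses
instance (clients : List (Int × Int)) (houses : List (Int × Int)) (out : Int) : Decidable (Spec_real_estate_broker clients houses out) := by unfold Spec_real_estate_broker; infer_instance

-- ===== CLAIM (what is proved, stated in full; the proofs are below) =====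
def Claim_equal_real_estate_broker : Prop := ∀ (clients : List (Int × Int)) (houses : List (Int × Int)), Dom_real_estate_broker clients houses → Spec_real_estate_broker clients houses (real_estate_broker clients houses)

-- ===== LEMMAS AND PROOFS =====

/-- Compatibility: house `h` suits client `c`. -/
def pvCompat (c h : Int × Int) : Prop := c.1 < h.1 ∧ h.2 ≤ c.2

/-- `pvM cl hs k`: some `k` client–house pairs, clients a sub-multiset of `cl`,
houses a sub-multiset of `hs`, every pair compatible. -/
def pvM (cl hs : List (Int × Int)) (k : Nat) : Prop :=
  ∃ P : List ((Int × Int) × (Int × Int)), P.length = k ∧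
    List.Subperm (P.map Prod.fst) cl ∧ List.Subperm (P.map Prod.snd) hs ∧ ∀ q ∈ P, pvCompat q.1 q.2

-- ---------- A-side basics ----------

theorem pvEqW_iff (a b : Option Int) : pvEqW a b = true ↔ a = b := by
  cases a <;> cases b <;> simp [pvEqW]

theorem pvEqW_ff (a b : Option Int) : pvEqW a b = false ↔ a ≠ b := by
  rw [← Bool.not_eq_true, not_iff_not, pvEqW_iff]

theorem pvInc_some (e : Int) : pvInc (some e) = some (e + 1) := rfl

def pvHGp (n m : Int) (G : Int → List Int) : Prop :=
  ∀ v u, u ∈ G v → (1 ≤ v ∧ v ≤ n) ∧ (n + 1 ≤ u ∧ u ≤ n + m)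

def pvValid (n m : Int) (G : Int → List Int) (M : Int → Int) : Prop :=
  (∀ v, 1 ≤ v → v ≤ n → M v ≠ 0 → M v ∈ G v ∧ M (M v) = v) ∧
  (∀ u, n + 1 ≤ u → u ≤ n + m → M u ≠ 0 → u ∈ G (M u) ∧ M (M u) = u ∧ 1 ≤ M u ∧ M u ≤ n) ∧
  (∀ x, (x < 1 ∨ n + m < x) → M x = 0)

def pvMCnt (n : Int) (M : Int → Int) : Nat :=
  (PySem.List.pyRange 1 (n + 1) 1).countP (fun v => decide (M v ≠ 0))

def pvDB (n : Int) (D : Int → Option Int) : Prop :=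
  ∀ x e, ((1 ≤ x ∧ x ≤ n) ∨ x = 0) → D x = some e → 0 ≤ e ∧ e ≤ n + 1

inductive pvGood (G : Int → List Int) (M : Int → Int) (D : Int → Option Int) : Int → Prop
  | term (v u : Int) (hu : u ∈ G v) (hm : M u = 0) (hd : D 0 = pvInc (D v)) : pvGood G M D v
  | step (v u : Int) (hu : u ∈ G v) (hm : M u ≠ 0) (hd : D (M u) = pvInc (D v))
      (hg : pvGood G M D (M u)) : pvGood G M D v

theorem pvGood_not_none {G M D} (hD0 : D 0 ≠ none) :
    ∀ {v}, pvGood G M D v → D v ≠ none := by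
  intro v h
  induction h with
  | term v u hu hm hd =>
    intro hv
    rw [hv] at hd
    exact hD0 (by simpa [pvInc] using hd)
  | step v u hu hm hd hg ih =>
    intro hv
    rw [hv] at hd
    simp only [pvInc, Option.map_none] at hd
    exact ih hd

theorem pvGood_mono {G M D D'} (href : ∀ x, D x ≠ none → D' x = D x) (hD0 : D 0 ≠ none) :
    ∀ {v}, pvGood G M D v → pvGood G M D' v := by
  intro v h
  induction h with
  | term v u hu hm hd =>
    have hv : D v ≠ none := by
      intro hv; rw [hv] at hd; exact hD0 (by simpa [pvInc] using hd)
    exact pvGood.term v u hu hm (by rw [href 0 hD0, href v hv, hd])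
  | step v u hu hm hd hg ih =>
    have hmu : D (M u) ≠ none := pvGood_not_none hD0 hg
    have hv : D v ≠ none := by
      intro hv; rw [hv] at hd; simp only [pvInc, Option.map_none] at hd; exact hmu hd
    exact pvGood.step v u hu hm (by rw [href _ hmu, href v hv, hd]) ih

theorem pvGood_mark {G M D x} (hx : ¬ pvGood G M D x) (hx0 : x ≠ 0) :
    ∀ {y}, pvGood G M D y → pvGood G M (pvUpd D x none) y := by
  intro y h
  induction h with
  | term v u hu hm hd =>
    have hvx : v ≠ x := fun he => hx (he ▸ pvGood.term v u hu hm hd)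
    exact pvGood.term v u hu hm (by simpa [pvUpd, Ne.symm hx0, hvx] using hd)
  | step v u hu hm hd hg ih =>
    have hvx : v ≠ x := fun he => hx (he ▸ pvGood.step v u hu hm hd hg)
    have hmux : M u ≠ x := fun he => hx (he ▸ hg)
    exact pvGood.step v u hu hm (by simpa [pvUpd, hmux, hvx] using hd) ih

inductive pvChain (G : Int → List Int) (M : Int → Int) (D : Int → Option Int) : Int → Int → Prop
  | base (v : Int) : pvChain G M D v v
  | step (v x u : Int) (hc : pvChain G M D v x) (hu : u ∈ G x) (hm : M u ≠ 0)
      (he : ∃ e, D x = some e ∧ D (M u) = some (e + 1)) : pvChain G M D v (M u)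

theorem pvChain_mono {G M D D'} (href : ∀ x, D x ≠ none → D' x = D x) :
    ∀ {v x}, pvChain G M D v x → pvChain G M D' v x := by
  intro v x h
  induction h with
  | base => exact pvChain.base v
  | step x u hc hu hm he ih =>
    obtain ⟨e, he1, he2⟩ := he
    exact pvChain.step v x u ih hu hm ⟨e, by rw [href x (by simp [he1]), he1],
      by rw [href _ (by simp [he2]), he2]⟩

theorem pvChain_glue {G M D} : ∀ {v x}, pvChain G M D v x → pvGood G M D x → pvGood G M D v := by
  intro v x h
  induction h with
  | base => exact fun h => h
  | step x u hc hu hm he ih =>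
    intro hgood
    obtain ⟨e, he1, he2⟩ := he
    exact ih (pvGood.step x u hu hm (by rw [he2, he1]; rfl) hgood)

theorem pv_countP_flip {f g : Int → Bool} :
    ∀ {R : List Int}, R.Nodup → ∀ {v}, v ∈ R → (∀ w ∈ R, w ≠ v → f w = g w) →
      f v = true → g v = false → R.countP f = R.countP g + 1 := by
  intro R
  induction R with
  | nil => simp
  | cons a t ih =>
    intro hnd v hv hfg hf hg
    rw [List.nodup_cons] at hnd
    rcases List.mem_cons.mp hv with rfl | hv
    · have ht : t.countP f = t.countP g := by
        apply List.countP_congr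
        intro w hw
        rw [hfg w (List.mem_cons_of_mem _ hw) (fun he => hnd.1 (he ▸ hw))]
      rw [List.countP_cons, List.countP_cons, ht, hf, hg]
      simp
    · have ha : f a = g a := hfg a List.mem_cons_self (fun he => hnd.1 (he ▸ hv))
      have := ih hnd.2 hv (fun w hw hne => hfg w (List.mem_cons_of_mem _ hw) hne) hf hg
      rw [List.countP_cons, List.countP_cons, this, ha]
      omega

-- ---------- the graph ----------

def pvEdgeList (houses : List (Int × Int)) (n : Int) (c : Int × Int) : List Int :=
  ((PySem.List.enumerate houses 1).filter
    (fun jh => decide (c.1 < jh.2.1 ∧ jh.2.2 ≤ c.2))).map (fun jh => jh.1 + n)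

theorem pvBG_inner (n : Int) (ic : Int × (Int × Int)) :
    ∀ (l : List (Int × Int)) (s : Int) (g : Int → List Int),
      (∀ x, x ≠ ic.1 →
        ((PySem.List.enumerate l s).foldl (fun g' jh =>
          if ic.2.1 < jh.2.1 ∧ jh.2.2 ≤ ic.2.2 then pvUpd g' ic.1 (g' ic.1 ++ [jh.1 + n]) else g') g) x = g x) ∧
      ((PySem.List.enumerate l s).foldl (fun g' jh =>
          if ic.2.1 < jh.2.1 ∧ jh.2.2 ≤ ic.2.2 then pvUpd g' ic.1 (g' ic.1 ++ [jh.1 + n]) else g') g) ic.1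
        = g ic.1 ++ ((PySem.List.enumerate l s).filter
            (fun jh => decide (ic.2.1 < jh.2.1 ∧ jh.2.2 ≤ ic.2.2))).map (fun jh => jh.1 + n) := by
  intro l
  induction l with
  | nil => intro s g; simp [PySem.List.enumerate_nil]
  | cons h t ih =>
    intro s g
    rw [PySem.List.enumerate_cons]
    by_cases hc : ic.2.1 < h.1 ∧ h.2 ≤ ic.2.2
    · constructor
      · intro x hx
        rw [List.foldl_cons, if_pos hc]
        rw [(ih (s+1) _).1 x hx]
        simp [pvUpd, hx]
      · rw [List.foldl_cons, if_pos hc, (ih (s+1) _).2]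
        simp [pvUpd, hc]
    · constructor
      · intro x hx
        rw [List.foldl_cons, if_neg hc]
        exact (ih (s+1) g).1 x hx
      · rw [List.foldl_cons, if_neg hc, (ih (s+1) g).2]
        simp [hc]

theorem pvBG_outer (n : Int) (hs : List (Int × Int)) :
    ∀ (l : List (Int × Int)) (s : Int) (g : Int → List Int) (v : Int),
      ((PySem.List.enumerate l s).foldl (fun g ic =>
        (PySem.List.enumerate hs 1).foldl (fun g' jh =>
          if ic.2.1 < jh.2.1 ∧ jh.2.2 ≤ ic.2.2 then pvUpd g' ic.1 (g' ic.1 ++ [jh.1 + n]) else g') g) g) v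
      = if s ≤ v ∧ v < s + l.length then g v ++ pvEdgeList hs n (l.getD (v - s).toNat (0, 0)) else g v := by
  intro l
  induction l with
  | nil => intro s g v; simp [PySem.List.enumerate_nil]
  | cons c t ih =>
    intro s g v
    rw [PySem.List.enumerate_cons, List.foldl_cons]
    rw [ih (s+1)]
    by_cases hv : v = s
    · subst hv
      rw [if_neg (by omega), if_pos (by simp only [List.length_cons]; push_cast; omega)]
      have := (pvBG_inner n (v, c) hs 1 g).2
      simp only at this
      rw [this]
      simp [pvEdgeList]
    · by_cases hrange : s + 1 ≤ v ∧ v < s + 1 + t.length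
      · rw [if_pos hrange, if_pos (by simp only [List.length_cons]; push_cast; omega)]
        have h1 := (pvBG_inner n (s, c) hs 1 g).1 v (by simpa using hv)
        simp only at h1
        rw [h1]
        have : (v - s).toNat = (v - (s+1)).toNat + 1 := by omega
        rw [this]
        simp
      · rw [if_neg hrange, if_neg (by simp only [List.length_cons]; push_cast; omega)]
        exact (pvBG_inner n (s, c) hs 1 g).1 v (by simpa using hv)

theorem pvBuildGraph_eq (cl hs : List (Int × Int)) (v : Int) :
    pvBuildGraph cl hs cl.length v =
      if 1 ≤ v ∧ v ≤ (cl.length : Int) then pvEdgeList hs cl.length (cl.getD (v - 1).toNat (0, 0))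
      else [] := by
  have := pvBG_outer (cl.length : Int) hs cl 1 (fun _ => []) v
  simp only [pvBuildGraph]
  rw [this]
  by_cases h : 1 ≤ v ∧ v < 1 + cl.length
  · rw [if_pos h, if_pos (by omega)]
    simp
  · rw [if_neg h, if_neg (by omega)]

theorem pvEdgeList_mem (hs : List (Int × Int)) (n : Int) (c : Int × Int) (u : Int) :
    u ∈ pvEdgeList hs n c ↔
      ∃ j : Nat, j < hs.length ∧ u = n + ((j : Int) + 1) ∧ pvCompat c (hs.getD j (0, 0)) := by
  simp only [pvEdgeList, List.mem_map, List.mem_filter, PySem.List.mem_enumerate_iff]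
  constructor
  · rintro ⟨jh, ⟨⟨k, hk, rfl⟩, hc⟩, rfl⟩
    refine ⟨k, hk, by ring, ?_⟩
    simp only [decide_eq_true_eq] at hc
    rwa [List.getD_eq_getElem hs (0,0) hk]
  · rintro ⟨j, hj, rfl, hc⟩
    refine ⟨(1 + (j : Int), hs[j]), ⟨⟨j, hj, rfl⟩, ?_⟩, by ring⟩
    rw [List.getD_eq_getElem hs (0,0) hj] at hc
    simpa using hc

theorem pvG_mem {cl hs : List (Int × Int)} {v u : Int}
    (h : u ∈ pvBuildGraph cl hs cl.length v) :
    (1 ≤ v ∧ v ≤ (cl.length : Int)) ∧ ∃ j : Nat, j < hs.length ∧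
      u = (cl.length : Int) + ((j : Int) + 1) ∧
      pvCompat (cl.getD (v - 1).toNat (0, 0)) (hs.getD j (0, 0)) := by
  rw [pvBuildGraph_eq] at h
  split at h
  · rename_i hv
    exact ⟨hv, (pvEdgeList_mem _ _ _ _).mp h⟩
  · simp at h

theorem pvG_mem' {cl hs : List (Int × Int)} {v : Int} {j : Nat}
    (hv1 : 1 ≤ v) (hv2 : v ≤ (cl.length : Int)) (hj : j < hs.length)
    (hc : pvCompat (cl.getD (v - 1).toNat (0, 0)) (hs.getD j (0, 0))) :
    ((cl.length : Int) + ((j : Int) + 1)) ∈ pvBuildGraph cl hs cl.length v := by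
  rw [pvBuildGraph_eq, if_pos ⟨hv1, hv2⟩, pvEdgeList_mem]
  exact ⟨j, hj, rfl, hc⟩

theorem pvG_HG (cl hs : List (Int × Int)) :
    pvHGp (cl.length : Int) (hs.length : Int) (pvBuildGraph cl hs cl.length) := by
  intro v u h
  obtain ⟨hv, j, hj, rfl, _⟩ := pvG_mem h
  refine ⟨hv, by omega⟩

-- ---------- dfs specification ----------

theorem pvUpd_self {α : Type} (f : Int → α) (k : Int) (x : α) : pvUpd f k x k = x := by
  simp [pvUpd]

theorem pvUpd_ne {α : Type} (f : Int → α) (k : Int) (x : α) {y : Int} (h : y ≠ k) :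
    pvUpd f k x y = f y := by simp [pvUpd, h]

/-- Dist entries changed by a dfs pass: set to `none` (= inf), client keys only,
`w` (the failing root) or matched clients, previous value at least `dlo`. -/
def pvMarksD (n : Int) (M : Int → Int) (w : Int) (D D' : Int → Option Int) (dlo : Int) : Prop :=
  ∀ x, D' x ≠ D x → D' x = none ∧ (1 ≤ x ∧ x ≤ n) ∧ (x = w ∨ M x ≠ 0) ∧
    ∃ e, D x = some e ∧ dlo ≤ e

theorem pvMarksD_refl {n : Int} {M : Int → Int} {w : Int} {D : Int → Option Int} {c : Int} :
    pvMarksD n M w D D c := fun _ hx => absurd rfl hx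

theorem pvMarksD_weaken {n : Int} {M : Int → Int} {w : Int} {D D' : Int → Option Int} {c c' : Int}
    (hcc : c' ≤ c) (h : pvMarksD n M w D D' c) : pvMarksD n M w D D' c' := by
  intro x hx
  obtain ⟨h1, h2, h3, e, h4, h5⟩ := h x hx
  exact ⟨h1, h2, h3, e, h4, by omega⟩

theorem pvMarksD_trans {n : Int} {M : Int → Int} {D1 D2 D3 : Int → Option Int} {c : Int}
    (h1 : pvMarksD n M 0 D1 D2 c) (h2 : pvMarksD n M 0 D2 D3 c) : pvMarksD n M 0 D1 D3 c := by
  intro x hx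
  by_cases h23 : D3 x = D2 x
  · rw [h23] at hx ⊢
    exact h1 x hx
  · obtain ⟨g1, g2, g3, e, g4, g5⟩ := h2 x h23
    by_cases h12 : D2 x = D1 x
    · rw [← h12]
      exact ⟨g1, g2, g3, e, g4, g5⟩
    · obtain ⟨f1, _, _, _, _, _⟩ := h1 x h12
      rw [f1] at g4
      exact absurd g4 (by simp)

theorem pvMarksD_keep {n : Int} {M : Int → Int} {w : Int} {D D' : Int → Option Int} {c : Int}
    (h : pvMarksD n M w D D' c) {x e : Int} (hx : D x = some e) (he : e < c) : D' x = D x := by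
  by_contra hne
  obtain ⟨_, _, _, e', h4, h5⟩ := h x hne
  rw [hx] at h4
  injection h4 with h4
  omega

theorem pvMarksD_keep0 {n : Int} {M : Int → Int} {w : Int} {D D' : Int → Option Int} {c : Int}
    (h : pvMarksD n M w D D' c) : D' 0 = D 0 := by
  by_contra hne
  obtain ⟨_, h2, _, _⟩ := h 0 hne
  omega

theorem pvDB_marks {n : Int} {M : Int → Int} {w : Int} {D D' : Int → Option Int} {c : Int}
    (h : pvDB n D) (hm : pvMarksD n M w D D' c) : pvDB n D' := by
  intro x e hx hde
  by_cases hch : D' x = D x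
  · exact h x e hx (hch ▸ hde)
  · obtain ⟨h1, _, _, _⟩ := hm x hch
    rw [h1] at hde
    exact absurd hde (by simp)

/-- Augmentation effect of a successful dfs from `v` (entry distance `d`):
`v` gets (re)matched along graph edges, everything stays a partial matching except
possibly the dangling old house `M v` (which still points at `v`), and all other
touched vertices lie strictly deeper than `d` in the BFS layering. -/
def pvSucc (n m : Int) (G : Int → List Int) (M M' : Int → Int) (D : Int → Option Int)
    (v d : Int) : Prop :=
  M' v ≠ 0 ∧ M' v ≠ M v ∧
  (∀ w, 1 ≤ w → w ≤ n → w ≠ v → (M' w ≠ 0 ↔ M w ≠ 0)) ∧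
  (∀ w, 1 ≤ w → w ≤ n → M' w ≠ 0 → M' w ∈ G w ∧ M' (M' w) = w) ∧
  (∀ u, n + 1 ≤ u → u ≤ n + m → u ≠ M v → M' u ≠ 0 →
    u ∈ G (M' u) ∧ M' (M' u) = u ∧ 1 ≤ M' u ∧ M' u ≤ n) ∧
  (M v ≠ 0 → M' (M v) = v) ∧
  (∀ x, (x < 1 ∨ n + m < x) → M' x = M x) ∧
  (∀ x, 1 ≤ x → x ≤ n → M' x ≠ M x → x = v ∨ ∃ e, D x = some e ∧ d + 1 ≤ e) ∧
  (∀ x, n + 1 ≤ x → x ≤ n + m → M' x ≠ M x → M x = 0 ∨ ∃ e, D (M x) = some e ∧ d + 1 ≤ e)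

/-- One usable edge out of `v` in the layered graph. -/
def pvGoodVia (G : Int → List Int) (M : Int → Int) (D : Int → Option Int) (v u : Int) : Prop :=
  u ∈ G v ∧ ((M u = 0 ∧ D 0 = pvInc (D v)) ∨
    (M u ≠ 0 ∧ D (M u) = pvInc (D v) ∧ pvGood G M D (M u)))

theorem pvGood_via_iff {G : Int → List Int} {M : Int → Int} {D : Int → Option Int} {v : Int} :
    pvGood G M D v ↔ ∃ u ∈ G v, pvGoodVia G M D v u := by
  constructor
  · intro h
    cases h with
    | term v u hu hm hd => exact ⟨u, hu, hu, Or.inl ⟨hm, hd⟩⟩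
    | step v u hu hm hd hg => exact ⟨u, hu, hu, Or.inr ⟨hm, hd, hg⟩⟩
  · rintro ⟨u, hu, _, h | h⟩
    · exact pvGood.term v u hu h.1 h.2
    · exact pvGood.step v u hu h.1 h.2.1 h.2.2

-- ---------- augmentation lemmas ----------

theorem pvSucc_base {n m : Int} {G : Int → List Int} (HG : pvHGp n m G)
    {M : Int → Int} {D : Int → Option Int} {v d u : Int}
    (hV : pvValid n m G M) (hv1 : 1 ≤ v) (hv2 : v ≤ n) (hu : u ∈ G v) (hmu : M u = 0) :
    pvSucc n m G M (pvUpd (pvUpd M u v) v u) D v d := by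
  obtain ⟨hVc, hVh, hVo⟩ := hV
  have hub := (HG v u hu).2
  have huv : u ≠ v := by omega
  have hu0 : u ≠ 0 := by omega
  have hMvu : M v ≠ u := by
    intro he
    by_cases hMv0 : M v = 0
    · rw [hMv0] at he; exact hu0 he.symm
    · have := (hVc v hv1 hv2 hMv0).2
      rw [he, hmu] at this
      omega
  have hNoCl : ∀ w, 1 ≤ w → w ≤ n → M w ≠ u := by
    intro w h1 h2 he
    have hw0 : M w ≠ 0 := by rw [he]; exact hu0
    have := (hVc w h1 h2 hw0).2
    rw [he, hmu] at this
    omega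
  have hMv : pvUpd (pvUpd M u v) v u v = u := pvUpd_self ..
  have hMu : pvUpd (pvUpd M u v) v u u = v := by
    rw [pvUpd_ne _ _ _ huv, pvUpd_self]
  have hMother : ∀ x, x ≠ u → x ≠ v → pvUpd (pvUpd M u v) v u x = M x := by
    intro x h1 h2
    rw [pvUpd_ne _ _ _ h2, pvUpd_ne _ _ _ h1]
  refine ⟨by rw [hMv]; exact hu0, by rw [hMv]; exact fun h => hMvu h.symm, ?_, ?_, ?_, ?_, ?_, ?_, ?_⟩
  · intro w h1 h2 h3
    rw [hMother w (by omega) h3]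
  · intro w h1 h2 hw
    by_cases hwv : w = v
    · subst hwv
      rw [hMv]
      exact ⟨hu, by rw [hMu]⟩
    · rw [hMother w (by omega) hwv] at hw ⊢
      obtain ⟨g1, g2⟩ := hVc w h1 h2 hw
      refine ⟨g1, ?_⟩
      have hMw := (HG w (M w) g1).2
      rw [hMother (M w) (hNoCl w h1 h2) (by omega), g2]
  · intro u' h1 h2 h3 h4
    by_cases hu'u : u' = u
    · subst hu'u
      rw [hMu]
      exact ⟨hu, by rw [hMv], hv1, hv2⟩
    · rw [hMother u' hu'u (by omega)] at h4 ⊢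
      obtain ⟨g1, g2, g3, g4⟩ := hVh u' h1 h2 h4
      refine ⟨g1, ?_, g3, g4⟩
      have hMu'v : M u' ≠ v := by
        intro he
        rw [he] at g2
        exact h3 g2.symm
      rw [hMother (M u') (by omega) hMu'v, g2]
  · intro hMv0
    have := (hVc v hv1 hv2 hMv0).1
    have hb := (HG v (M v) this).2
    rw [hMother (M v) hMvu (by omega)]
    exact (hVc v hv1 hv2 hMv0).2
  · intro x hx
    rw [hMother x (by omega) (by omega)]
  · intro x h1 h2 h3
    by_cases hxv : x = v
    · exact Or.inl hxv
    · rw [hMother x (by omega) hxv] at h3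
      exact absurd rfl h3
  · intro x h1 h2 h3
    by_cases hxu : x = u
    · subst hxu; exact Or.inl hmu
    · rw [hMother x hxu (by omega)] at h3
      exact absurd rfl h3

theorem pvSucc_comp {n m : Int} {G : Int → List Int} (HG : pvHGp n m G)
    {M Mc : Int → Int} {D : Int → Option Int} {v d u : Int}
    (hV : pvValid n m G M) (hv1 : 1 ≤ v) (hv2 : v ≤ n) (hd : D v = some d)
    (hu : u ∈ G v) (hmu : M u ≠ 0) (hg : D (M u) = some (d + 1))
    (hsc : pvSucc n m G M Mc D (M u) (d + 1)) :
    pvSucc n m G M (pvUpd (pvUpd Mc u v) v u) D v d := by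
  obtain ⟨hVc, hVh, hVo⟩ := hV
  obtain ⟨c1, c2, c3, c4, c5, c6, c7, c8, c9⟩ := hsc
  have hub := (HG v u hu).2
  have huv : u ≠ v := by omega
  have hu0 : u ≠ 0 := by omega
  have hv'b := hVh u hub.1 hub.2 hmu
  have hMv' : M (M u) = u := hv'b.2.1
  have hv'v : M u ≠ v := by
    intro he
    rw [he, hd] at hg
    injection hg with hg
    omega
  have hMcv : Mc v = M v := by
    by_cases hch : Mc v = M v
    · exact hch
    · rcases c8 v hv1 hv2 hch with he | ⟨e, he1, he2⟩
      · exact absurd he.symm hv'v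
      · rw [hd] at he1; injection he1 with he1; omega
  have hMcu : Mc u = M u := by
    have h6 := c6 (by rw [hMv']; exact hu0)
    rw [hMv'] at h6
    exact h6
  have hMvu : M v ≠ u := by
    intro he
    have hMv0 : M v ≠ 0 := by rw [he]; exact hu0
    have := (hVc v hv1 hv2 hMv0).2
    rw [he] at this
    exact hv'v this
  have hMv : pvUpd (pvUpd Mc u v) v u v = u := pvUpd_self ..
  have hMu : pvUpd (pvUpd Mc u v) v u u = v := by rw [pvUpd_ne _ _ _ huv, pvUpd_self]
  have hMother : ∀ x, x ≠ u → x ≠ v → pvUpd (pvUpd Mc u v) v u x = Mc x := by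
    intro x h1 h2
    rw [pvUpd_ne _ _ _ h2, pvUpd_ne _ _ _ h1]
  refine ⟨by rw [hMv]; exact hu0, by rw [hMv]; exact fun h => hMvu h.symm, ?_, ?_, ?_, ?_, ?_, ?_, ?_⟩
  · intro w h1 h2 h3
    rw [hMother w (by omega) h3]
    by_cases hwv' : w = M u
    · subst hwv'
      constructor
      · intro _; rw [hMv']; exact hu0
      · intro _; exact c1
    · exact c3 w h1 h2 hwv'
  · intro w h1 h2 hw
    by_cases hwv : w = v
    · subst hwv
      rw [hMv]
      exact ⟨hu, by rw [hMu]⟩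
    · rw [hMother w (by omega) hwv] at hw ⊢
      obtain ⟨g1, g2⟩ := c4 w h1 h2 hw
      refine ⟨g1, ?_⟩
      have hMw := (HG w (Mc w) g1).2
      have hMwu : Mc w ≠ u := by
        intro he
        rw [he, hMcu] at g2
        rw [← g2] at he
        exact c2 (by rw [hMv']; exact he)
      rw [hMother (Mc w) hMwu (by omega), g2]
  · intro u' h1 h2 h3 h4
    by_cases hu'u : u' = u
    · subst hu'u
      rw [hMu]
      exact ⟨hu, by rw [hMv], hv1, hv2⟩
    · rw [hMother u' hu'u (by omega)] at h4 ⊢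
      obtain ⟨g1, g2, g3, g4⟩ := c5 u' h1 h2 (by rw [hMv']; exact hu'u) h4
      refine ⟨g1, ?_, g3, g4⟩
      have hMu'v : Mc u' ≠ v := by
        intro he
        rw [he] at g2
        rw [hMcv] at g2
        exact h3 g2.symm
      rw [hMother (Mc u') (by omega) hMu'v, g2]
  · intro hMv0
    have hin := (hVc v hv1 hv2 hMv0).1
    have hb := (HG v (M v) hin).2
    rw [hMother (M v) hMvu (by omega)]
    have : Mc (M v) = M (M v) := by
      by_cases hch : Mc (M v) = M (M v)
      · exact hch
      · rcases c9 (M v) hb.1 hb.2 hch with he | ⟨e, he1, he2⟩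
        · rw [(hVc v hv1 hv2 hMv0).2] at he; omega
        · rw [(hVc v hv1 hv2 hMv0).2, hd] at he1
          injection he1 with he1
          omega
    rw [this]
    exact (hVc v hv1 hv2 hMv0).2
  · intro x hx
    rw [hMother x (by omega) (by omega)]
    exact c7 x hx
  · intro x h1 h2 h3
    by_cases hxv : x = v
    · exact Or.inl hxv
    · rw [hMother x (by omega) hxv] at h3
      rcases c8 x h1 h2 h3 with he | ⟨e, he1, he2⟩
      · subst he
        exact Or.inr ⟨d + 1, hg, by omega⟩
      · exact Or.inr ⟨e, he1, by omega⟩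
  · intro x h1 h2 h3
    by_cases hxu : x = u
    · subst hxu
      exact Or.inr ⟨d + 1, by rw [← hg], by omega⟩
    · rw [hMother x hxu (by omega)] at h3
      rcases c9 x h1 h2 h3 with he | ⟨e, he1, he2⟩
      · exact Or.inl he
      · exact Or.inr ⟨e, he1, by omega⟩


/-- dfs conclusions at a given fuel. -/
def pvPdfs (n m : Int) (G : Int → List Int) (fuel : Nat) : Prop :=
  ∀ (M : Int → Int) (D : Int → Option Int) (v d : Int),
    pvValid n m G M → pvDB n D → D 0 ≠ none →
    1 ≤ v → v ≤ n → D v = some d → n + 2 ≤ (fuel : Int) + d →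
    ((pvDfs G fuel M D v).1 = false →
      (pvDfs G fuel M D v).2.1 = M ∧
      pvMarksD n M v D (pvDfs G fuel M D v).2.2 d ∧
      (∀ y, pvGood G M D y → pvGood G M (pvDfs G fuel M D v).2.2 y) ∧
      (pvDfs G fuel M D v).2.2 v = none) ∧
    ((pvDfs G fuel M D v).1 = true →
      pvSucc n m G M (pvDfs G fuel M D v).2.1 D v d ∧
      pvMarksD n M 0 D (pvDfs G fuel M D v).2.2 (d + 1)) ∧
    (pvGood G M D v → (pvDfs G fuel M D v).1 = true)

/-- scan conclusions at a given fuel. -/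
def pvPscan (n m : Int) (G : Int → List Int) (fuel : Nat) : Prop :=
  ∀ (us : List Int) (M : Int → Int) (D : Int → Option Int) (v d : Int),
    pvValid n m G M → pvDB n D → D 0 ≠ none →
    1 ≤ v → v ≤ n → D v = some d → n + 1 ≤ (fuel : Int) + d →
    (∀ u ∈ us, u ∈ G v) →
    ((pvDfsScan G fuel M D v us).1 = false →
      (pvDfsScan G fuel M D v us).2.1 = M ∧
      pvMarksD n M 0 D (pvDfsScan G fuel M D v us).2.2 (d + 1) ∧
      (∀ y, pvGood G M D y → pvGood G M (pvDfsScan G fuel M D v us).2.2 y) ∧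
      (∀ u ∈ us, ¬ pvGoodVia G M (pvDfsScan G fuel M D v us).2.2 v u)) ∧
    ((pvDfsScan G fuel M D v us).1 = true →
      pvSucc n m G M (pvDfsScan G fuel M D v us).2.1 D v d ∧
      pvMarksD n M 0 D (pvDfsScan G fuel M D v us).2.2 (d + 1)) ∧
    ((∃ u ∈ us, pvGoodVia G M D v u) → (pvDfsScan G fuel M D v us).1 = true)

-- ---------- the dfs/scan induction ----------

theorem pvScan_consFalse {n m : Int} {G : Int → List Int} {fuel : Nat}
    {M : Int → Int} {D : Int → Option Int} {v d u : Int} {us : List Int}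
    (hd : D v = some d) (hg : pvEqW (D (M u)) (pvInc (D v))  = false)
    (hrest :
      ((pvDfsScan G fuel M D v us).1 = false →
        (pvDfsScan G fuel M D v us).2.1 = M ∧
        pvMarksD n M 0 D (pvDfsScan G fuel M D v us).2.2 (d + 1) ∧
        (∀ y, pvGood G M D y → pvGood G M (pvDfsScan G fuel M D v us).2.2 y) ∧
        (∀ u' ∈ us, ¬ pvGoodVia G M (pvDfsScan G fuel M D v us).2.2 v u')) ∧
      ((pvDfsScan G fuel M D v us).1 = true →
        pvSucc n m G M (pvDfsScan G fuel M D v us).2.1 D v d ∧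
        pvMarksD n M 0 D (pvDfsScan G fuel M D v us).2.2 (d + 1)) ∧
      ((∃ u' ∈ us, pvGoodVia G M D v u') → (pvDfsScan G fuel M D v us).1 = true)) :
    ((pvDfsScan G fuel M D v (u :: us)).1 = false →
      (pvDfsScan G fuel M D v (u :: us)).2.1 = M ∧
      pvMarksD n M 0 D (pvDfsScan G fuel M D v (u :: us)).2.2 (d + 1) ∧
      (∀ y, pvGood G M D y → pvGood G M (pvDfsScan G fuel M D v (u :: us)).2.2 y) ∧
      (∀ u' ∈ u :: us, ¬ pvGoodVia G M (pvDfsScan G fuel M D v (u :: us)).2.2 v u')) ∧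
    ((pvDfsScan G fuel M D v (u :: us)).1 = true →
      pvSucc n m G M (pvDfsScan G fuel M D v (u :: us)).2.1 D v d ∧
      pvMarksD n M 0 D (pvDfsScan G fuel M D v (u :: us)).2.2 (d + 1)) ∧
    ((∃ u' ∈ u :: us, pvGoodVia G M D v u') → (pvDfsScan G fuel M D v (u :: us)).1 = true) := by
  have hgf : D (M u) ≠ pvInc (D v) := (pvEqW_ff _ _).mp hg
  have heq : pvDfsScan G fuel M D v (u :: us) = pvDfsScan G fuel M D v us := by
    rw [pvDfsScan]
    simp [hg]
  rw [heq]
  obtain ⟨hf, hs, hc⟩ := hrest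
  refine ⟨?_, hs, ?_⟩
  · intro hff
    obtain ⟨f1, f2, f3, f4⟩ := hf hff
    refine ⟨f1, f2, f3, ?_⟩
    intro u' hu'
    rcases List.mem_cons.mp hu' with rfl | hu'
    · rintro ⟨_, hvia⟩
      have hDv : (pvDfsScan G fuel M D v us).2.2 v = D v := pvMarksD_keep f2 hd (by omega)
      have hD0' : (pvDfsScan G fuel M D v us).2.2 0 = D 0 := pvMarksD_keep0 f2
      rcases hvia with ⟨hmu0, hveq⟩ | ⟨_, hveq, _⟩
      · rw [hD0', hDv] at hveq
        rw [hmu0] at hgf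
        exact hgf hveq
      · rw [hDv] at hveq
        by_cases hch : (pvDfsScan G fuel M D v us).2.2 (M u') = D (M u')
        · rw [hch] at hveq
          exact hgf hveq
        · have := (f2 _ hch).1
          rw [this, hd] at hveq
          exact absurd hveq.symm (by simp [pvInc])
    · exact f4 u' hu'
  · intro hex
    apply hc
    obtain ⟨u', hu', hvia⟩ := hex
    rcases List.mem_cons.mp hu' with rfl | hu'
    · exfalso
      obtain ⟨_, hvia⟩ := hvia
      rcases hvia with ⟨hmu0, hveq⟩ | ⟨_, hveq, _⟩
      · rw [hmu0] at hgf
        exact hgf hveq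
      · exact hgf hveq
    · exact ⟨u', hu', hvia⟩

theorem pvScan_nil {n m : Int} {G : Int → List Int} {fuel : Nat}
    {M : Int → Int} {D : Int → Option Int} {v d : Int} :
    ((pvDfsScan G fuel M D v []).1 = false →
      (pvDfsScan G fuel M D v []).2.1 = M ∧
      pvMarksD n M 0 D (pvDfsScan G fuel M D v []).2.2 (d + 1) ∧
      (∀ y, pvGood G M D y → pvGood G M (pvDfsScan G fuel M D v []).2.2 y) ∧
      (∀ u' ∈ ([] : List Int), ¬ pvGoodVia G M (pvDfsScan G fuel M D v []).2.2 v u')) ∧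
    ((pvDfsScan G fuel M D v []).1 = true →
      pvSucc n m G M (pvDfsScan G fuel M D v []).2.1 D v d ∧
      pvMarksD n M 0 D (pvDfsScan G fuel M D v []).2.2 (d + 1)) ∧
    ((∃ u' ∈ ([] : List Int), pvGoodVia G M D v u') → (pvDfsScan G fuel M D v []).1 = true) := by
  rw [pvDfsScan]
  exact ⟨fun _ => ⟨rfl, pvMarksD_refl, fun y h => h, by simp⟩, fun h => by simp at h, by simp⟩

theorem pvDfs_main {n m : Int} {G : Int → List Int} (HG : pvHGp n m G) (_hm0 : 0 ≤ m) :
    ∀ fuel : Nat, pvPdfs n m G fuel ∧ pvPscan n m G fuel := by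
  intro fuel
  induction fuel with
  | zero =>
    constructor
    · intro M D v d hV hDB hD0 hv1 hv2 hd hfuel
      exfalso
      have := (hDB v d (Or.inl ⟨hv1, hv2⟩) hd).2
      push_cast at hfuel
      omega
    · intro us
      induction us with
      | nil => intro M D v d hV hDB hD0 hv1 hv2 hd hfuel hsub; exact pvScan_nil
      | cons u us ihus =>
        intro M D v d hV hDB hD0 hv1 hv2 hd hfuel hsub
        by_cases hg : pvEqW (D (M u)) (pvInc (D v)) = true
        · exfalso
          rw [pvEqW_iff, hd] at hg
          simp only [pvInc_some] at hg
          push_cast at hfuel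
          by_cases hmu : M u = 0
          · rw [hmu] at hg
            have := (hDB 0 (d + 1) (Or.inr rfl) hg).2
            omega
          · have hub := (HG v u (hsub u List.mem_cons_self)).2
            have hcl := (hV.2.1 u hub.1 hub.2 hmu).2.2
            have := (hDB (M u) (d + 1) (Or.inl hcl) hg).2
            omega
        · rw [Bool.not_eq_true] at hg
          exact pvScan_consFalse hd hg
            (ihus M D v d hV hDB hD0 hv1 hv2 hd hfuel
              (fun u' hu' => hsub u' (List.mem_cons_of_mem _ hu')))
  | succ fuel ih =>
    have Pd : pvPdfs n m G (fuel + 1) := by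
      intro M D v d hV hDB hD0 hv1 hv2 hd hfuel
      have hne : v ≠ 0 := by omega
      obtain ⟨hf, hs, hc⟩ := ih.2 (G v) M D v d hV hDB hD0 hv1 hv2 hd
        (by push_cast at hfuel ⊢; omega) (fun u hu => hu)
      rcases hres : pvDfsScan G fuel M D v (G v) with ⟨b, M', D'⟩
      rw [hres] at hf hs hc
      have heq : pvDfs G (fuel + 1) M D v = (match (b, M', D') with
        | (true, mtc', dist') => (true, mtc', dist')
        | (false, mtc', dist') => (false, mtc', pvUpd dist' v none)) := by
        rw [pvDfs]
        simp only [hne, ne_eq, not_false_eq_true, if_pos, hres]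
      cases b
      · simp only at heq
        obtain ⟨f1, f2, f3, f4⟩ := hf rfl
        simp only at f1 f2 f3 f4
        refine ⟨?_, ?_, ?_⟩
        · intro _
          rw [heq]
          refine ⟨f1, ?_, ?_, by simp only; rw [pvUpd_self]⟩
          · intro x hx
            simp only at hx ⊢
            by_cases hxv : x = v
            · subst hxv
              rw [pvUpd_self]
              exact ⟨rfl, ⟨hv1, hv2⟩, Or.inl rfl, d, hd, le_refl d⟩
            · rw [pvUpd_ne _ _ _ hxv] at hx ⊢
              obtain ⟨g1, g2, g3, e, g4, g5⟩ := f2 x hx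
              refine ⟨g1, g2, ?_, e, g4, by omega⟩
              rcases g3 with g3 | g3
              · exfalso; omega
              · exact Or.inr g3
          · intro y hy
            simp only
            have hnotv : ¬ pvGood G M D' v := by
              intro hgv
              obtain ⟨u, hu, hvia⟩ := pvGood_via_iff.mp hgv
              exact f4 u hu hvia
            exact pvGood_mark hnotv hne (f3 y hy)
        · intro htr
          rw [heq] at htr
          simp at htr
        · intro hgood
          have := hc ⟨_, (pvGood_via_iff.mp hgood).choose_spec.1,
            (pvGood_via_iff.mp hgood).choose_spec.2⟩
          simp at this
      · simp only at heq
        obtain ⟨s1, s2⟩ := hs rfl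
        simp only at s1 s2
        refine ⟨?_, ?_, fun _ => by rw [heq]⟩
        · intro hff
          rw [heq] at hff
          simp at hff
        · intro _
          rw [heq]
          exact ⟨s1, s2⟩
    refine ⟨Pd, ?_⟩
    intro us
    induction us with
    | nil => intro M D v d hV hDB hD0 hv1 hv2 hd hfuel hsub; exact pvScan_nil
    | cons u us ihus =>
      intro M D v d hV hDB hD0 hv1 hv2 hd hfuel hsub
      have hu : u ∈ G v := hsub u List.mem_cons_self
      have hub := (HG v u hu).2
      by_cases hgB : pvEqW (D (M u)) (pvInc (D v)) = true
      · have hg : D (M u) = some (d + 1) := by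
          rw [pvEqW_iff] at hgB
          rw [hgB, hd]
          rfl
        by_cases hmu : M u = 0
        · -- immediate augment through the free house u
          have hscan : pvDfsScan G (fuel + 1) M D v (u :: us) =
              (true, pvUpd (pvUpd M u v) v u, D) := by
            rw [pvDfsScan]
            simp only [hgB, if_true]
            rw [hmu, pvDfs]
            simp
          rw [hscan]
          refine ⟨fun h => by simp at h, fun _ => ⟨pvSucc_base HG hV hv1 hv2 hu hmu, pvMarksD_refl⟩,
            fun _ => rfl⟩
        · -- recurse through the matched client M u
          have hclB := hV.2.1 u hub.1 hub.2 hmu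
          obtain ⟨cf, cs, cc⟩ := Pd M D (M u) (d + 1) hV hDB hD0 hclB.2.2.1 hclB.2.2.2 hg
            (by push_cast at hfuel ⊢; omega)
          rcases hres : pvDfs G (fuel + 1) M D (M u) with ⟨b, Mc, Dc⟩
          rw [hres] at cf cs cc
          cases b
          · -- child failed: continue the scan on the marked dists
            obtain ⟨cf1, cf2, cf3, cf4⟩ := cf rfl
            simp only at cf1 cf2 cf3 cf4
            rw [cf1] at hres
            have cf2' : pvMarksD n M 0 D Dc (d + 1) := by
              intro x hx
              obtain ⟨g1, g2, g3, e, g4, g5⟩ := cf2 x hx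
              refine ⟨g1, g2, ?_, e, g4, g5⟩
              rcases g3 with g3 | g3
              · subst g3
                exact Or.inr (by rw [hclB.2.1]; omega)
              · exact Or.inr g3
            have hscan : pvDfsScan G (fuel + 1) M D v (u :: us) =
                pvDfsScan G (fuel + 1) M Dc v us := by
              rw [pvDfsScan]
              simp only [hgB, if_true, hres]
            have hDBc := pvDB_marks hDB cf2
            have hD0c : Dc 0 = D 0 := pvMarksD_keep0 cf2
            have hdc : Dc v = D v := pvMarksD_keep cf2 hd (by omega)
            obtain ⟨rf, rs, rc⟩ := ihus M Dc v d hV hDBc (by rw [hD0c]; exact hD0) hv1 hv2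
              (by rw [hdc]; exact hd) hfuel (fun u' hu' => hsub u' (List.mem_cons_of_mem _ hu'))
            rw [hscan]
            have htr : ∀ {x e : Int}, Dc x = some e → D x = some e := by
              intro x e hx
              by_cases hch : Dc x = D x
              · rw [← hch]; exact hx
              · rw [(cf2 x hch).1] at hx; exact absurd hx (by simp)
            refine ⟨?_, ?_, ?_⟩
            · intro hff
              obtain ⟨f1, f2, f3, f4⟩ := rf hff
              refine ⟨f1, pvMarksD_trans cf2' f2, fun y hy => f3 y (cf3 y hy), ?_⟩
              intro u' hu'
              rcases List.mem_cons.mp hu' with rfl | hu'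
              · rintro ⟨_, hvia⟩
                have hfv : (pvDfsScan G (fuel+1) M Dc v us).2.2 v = Dc v :=
                  pvMarksD_keep f2 (by rw [hdc]; exact hd) (by omega)
                rcases hvia with ⟨hmu', _⟩ | ⟨_, hveq, _⟩
                · exact hmu hmu'
                · have hnone : (pvDfsScan G (fuel+1) M Dc v us).2.2 (M u') = none := by
                    by_cases hch : (pvDfsScan G (fuel+1) M Dc v us).2.2 (M u') = Dc (M u')
                    · rw [hch, cf4]
                    · exact (f2 _ hch).1
                  rw [hnone, hfv, hdc, hd] at hveq
                  exact absurd hveq.symm (by simp [pvInc])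
              · exact f4 u' hu'
            · intro htru
              obtain ⟨s1, s2⟩ := rs htru
              constructor
              · obtain ⟨a1, a2, a3, a4, a5, a6, a7, a8, a9⟩ := s1
                refine ⟨a1, a2, a3, a4, a5, a6, a7, ?_, ?_⟩
                · intro x h1 h2 h3
                  rcases a8 x h1 h2 h3 with h | ⟨e, he, hee⟩
                  · exact Or.inl h
                  · exact Or.inr ⟨e, htr he, hee⟩
                · intro x h1 h2 h3
                  rcases a9 x h1 h2 h3 with h | ⟨e, he, hee⟩
                  · exact Or.inl h
                  · exact Or.inr ⟨e, htr he, hee⟩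
              · exact pvMarksD_trans cf2' s2
            · intro hex
              apply rc
              obtain ⟨u', hu', hvia⟩ := hex
              rcases List.mem_cons.mp hu' with rfl | hu'
              · exfalso
                obtain ⟨_, hvia⟩ := hvia
                rcases hvia with ⟨hmu', _⟩ | ⟨_, _, hgood⟩
                · exact hmu hmu'
                · have := cc hgood
                  simp at this
              · refine ⟨u', hu', ?_⟩
                obtain ⟨hu'G, hvia⟩ := hvia
                refine ⟨hu'G, ?_⟩
                rcases hvia with ⟨h1, h2⟩ | ⟨h1, h2, h3⟩
                · exact Or.inl ⟨h1, by rw [hD0c, hdc]; exact h2⟩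
                · have hgc : pvGood G M Dc (M u') := cf3 _ h3
                  have hkeep : Dc (M u') = D (M u') := by
                    by_cases hch : Dc (M u') = D (M u')
                    · exact hch
                    · exact absurd (cf2 _ hch).1 (pvGood_not_none (by rw [hD0c]; exact hD0) hgc)
                  exact Or.inr ⟨h1, by rw [hkeep, hdc]; exact h2, hgc⟩
          · -- child succeeded: augment through u
            obtain ⟨s1, s2⟩ := cs rfl
            simp only at s1 s2
            have hscan : pvDfsScan G (fuel + 1) M D v (u :: us) =
                (true, pvUpd (pvUpd Mc u v) v u, Dc) := by
              rw [pvDfsScan]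
              simp only [hgB, if_true, hres]
            rw [hscan]
            refine ⟨fun h => by simp at h, fun _ => ?_, fun _ => rfl⟩
            exact ⟨pvSucc_comp HG hV hv1 hv2 hd hu hmu hg s1,
              pvMarksD_weaken (by omega) s2⟩
      · rw [Bool.not_eq_true] at hgB
        exact pvScan_consFalse hd hgB
          (ihus M D v d hV hDB hD0 hv1 hv2 hd hfuel
            (fun u' hu' => hsub u' (List.mem_cons_of_mem _ hu')))

-- ---------- bfs ----------

/-- number of still-unset (`inf`) dist entries among the keys 0..n. -/
def pvTc (n : Int) (D : Int → Option Int) : Nat :=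
  (PySem.List.pyRange 0 (n + 1) 1).countP (fun x => decide (D x = none))

theorem pvTc_le {n : Int} (hn : 0 ≤ n) (D : Int → Option Int) : (pvTc n D : Int) ≤ n + 1 := by
  unfold pvTc
  have h1 := List.countP_le_length (l := PySem.List.pyRange 0 (n + 1) 1)
    (p := fun x => decide (D x = none))
  have h2 := PySem.List.length_pyRange_one (a := 0) (b := n + 1)
  omega

theorem pvTc_pos {n : Int} (hn : 0 ≤ n) {D : Int → Option Int} (h : D 0 = none) :
    1 ≤ pvTc n D := by
  unfold pvTc
  have h0 : (0 : Int) ∈ PySem.List.pyRange 0 (n + 1) 1 := by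
    rw [PySem.List.mem_pyRange_one]
    omega
  exact List.countP_pos_iff.mpr ⟨0, h0, by simp only [decide_eq_true_eq]; exact h⟩

theorem pvTc_write {n : Int} {D : Int → Option Int} {x : Int} {w : Option Int}
    (hx1 : 0 ≤ x) (hx2 : x ≤ n) (hnone : D x = none) (hw : w ≠ none) :
    pvTc n D = pvTc n (pvUpd D x w) + 1 := by
  unfold pvTc
  refine pv_countP_flip (PySem.List.nodup_pyRange_one 0 (n + 1))
    (v := x) (by rw [PySem.List.mem_pyRange_one]; omega) ?_ ?_ ?_
  · intro y _ hy
    rw [pvUpd_ne _ _ _ hy]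
  · simp only [decide_eq_true_eq]
    exact hnone
  · simp only [pvUpd_self, decide_eq_false_iff_not]
    exact hw

/-- Effect of the `for u in graph[v]` append loop of bfs. -/
theorem pvBfsFold_spec {n m : Int} {G : Int → List Int} (HG : pvHGp n m G)
    {M : Int → Int} (hV : pvValid n m G M) {v dv : Int} (hv1 : 1 ≤ v) (hv2 : v ≤ n) :
    ∀ (us : List Int) (D : Int → Option Int) (q : List Int),
      (∀ u ∈ us, u ∈ G v) → D v = some dv →
      (∀ x e, ((1 ≤ x ∧ x ≤ n) ∨ x = 0) → D x = some e → 0 ≤ e ∧ e + (pvTc n D : Int) ≤ n + 1) →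
      (∀ y ∈ q, ((1 ≤ y ∧ y ≤ n) ∨ y = 0) ∧ D y ≠ none) →
      (∀ x, 1 ≤ x → x ≤ n → D x ≠ none →
        ∃ v₀, (1 ≤ v₀ ∧ v₀ ≤ n) ∧ M v₀ = 0 ∧ pvChain G M D v₀ x) →
      (D 0 ≠ none → ∃ v₀, (1 ≤ v₀ ∧ v₀ ≤ n) ∧ M v₀ = 0 ∧ pvGood G M D v₀) →
      (∃ v₀, (1 ≤ v₀ ∧ v₀ ≤ n) ∧ M v₀ = 0 ∧ pvChain G M D v₀ v) →
      (let st := us.foldl (fun (st : (Int → Option Int) × List Int) u =>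
          if pvEqW (st.1 (M u)) none then (pvUpd st.1 (M u) (pvInc (st.1 v)), st.2 ++ [M u]) else st)
          (D, q)
       (∀ x, D x ≠ none → st.1 x = D x) ∧
       (∀ x e, ((1 ≤ x ∧ x ≤ n) ∨ x = 0) → st.1 x = some e → 0 ≤ e ∧ e + (pvTc n st.1 : Int) ≤ n + 1) ∧
       (st.2.length + pvTc n st.1 = q.length + pvTc n D) ∧
       (∃ ext, st.2 = q ++ ext) ∧
       (∀ y ∈ st.2, ((1 ≤ y ∧ y ≤ n) ∨ y = 0) ∧ st.1 y ≠ none) ∧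
       (∀ u ∈ us, (M u = 0 → st.1 0 ≠ none) ∧ (M u ≠ 0 → st.1 (M u) ≠ none)) ∧
       (st.1 v = D v) ∧
       (∀ x, 1 ≤ x → x ≤ n → st.1 x ≠ none →
         ∃ v₀, (1 ≤ v₀ ∧ v₀ ≤ n) ∧ M v₀ = 0 ∧ pvChain G M st.1 v₀ x) ∧
       (st.1 0 ≠ none → ∃ v₀, (1 ≤ v₀ ∧ v₀ ≤ n) ∧ M v₀ = 0 ∧ pvGood G M st.1 v₀) ∧
       (∀ x, st.1 x ≠ D x → x ∈ st.2)) := by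
  intro us
  induction us with
  | nil =>
    intro D q _ hdv hDB hq hreach hgood hchv
    simp only [List.foldl_nil]
    exact ⟨by simp, hDB, by simp, ⟨[], by simp⟩, hq, by simp, by simp, hreach, hgood, by simp⟩
  | cons u us ih =>
    intro D q hus hdv hDB hq hreach hgood hchv
    have huG : u ∈ G v := hus u List.mem_cons_self
    have hub := (HG v u huG).2
    rw [List.foldl_cons]
    by_cases hw : pvEqW (D (M u)) none = true
    · rw [pvEqW_iff] at hw
      -- the write step
      have hMu_b : (1 ≤ M u ∧ M u ≤ n) ∨ M u = 0 := by
        by_cases hmu : M u = 0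
        · exact Or.inr hmu
        · exact Or.inl (hV.2.1 u hub.1 hub.2 hmu).2.2
      have hMuv : M u ≠ v := by
        intro he
        rw [he, hdv] at hw
        exact absurd hw (by simp)
      set D1 := pvUpd D (M u) (pvInc (D v)) with hD1
      have hD1Mu : D1 (M u) = some (dv + 1) := by
        rw [hD1, pvUpd_self, hdv]
        rfl
      have hmono1 : ∀ x, D x ≠ none → D1 x = D x := by
        intro x hx
        rw [hD1, pvUpd_ne]
        intro he
        rw [he] at hx
        exact hx hw
      have hTc : pvTc n D = pvTc n D1 + 1 := by
        apply pvTc_write (by omega) (by omega) hw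
        rw [hdv]
        simp [pvInc]
      have hdv1 : D1 v = some dv := by
        rw [hmono1 v (by rw [hdv]; simp), hdv]
      have hDB1 : ∀ x e, ((1 ≤ x ∧ x ≤ n) ∨ x = 0) → D1 x = some e →
          0 ≤ e ∧ e + (pvTc n D1 : Int) ≤ n + 1 := by
        intro x e hxb hxe
        by_cases hxMu : x = M u
        · subst hxMu
          rw [hD1Mu] at hxe
          injection hxe with hxe
          have := hDB v dv (Or.inl ⟨hv1, hv2⟩) hdv
          omega
        · rw [hD1, pvUpd_ne _ _ _ hxMu] at hxe
          have := hDB x e hxb hxe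
          omega
      have hq1 : ∀ y ∈ q ++ [M u], ((1 ≤ y ∧ y ≤ n) ∨ y = 0) ∧ D1 y ≠ none := by
        intro y hy
        rcases List.mem_append.mp hy with hy | hy
        · obtain ⟨hb, hne⟩ := hq y hy
          exact ⟨hb, by rw [hmono1 y hne]; exact hne⟩
        · rw [List.mem_singleton] at hy
          subst hy
          exact ⟨hMu_b, by rw [hD1Mu]; simp⟩
      have hchv1 : ∃ v₀, (1 ≤ v₀ ∧ v₀ ≤ n) ∧ M v₀ = 0 ∧ pvChain G M D1 v₀ v := by
        obtain ⟨v₀, hb, hf, hc⟩ := hchv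
        exact ⟨v₀, hb, hf, pvChain_mono hmono1 hc⟩
      have hreach1 : ∀ x, 1 ≤ x → x ≤ n → D1 x ≠ none →
          ∃ v₀, (1 ≤ v₀ ∧ v₀ ≤ n) ∧ M v₀ = 0 ∧ pvChain G M D1 v₀ x := by
        intro x h1 h2 h3
        by_cases hxMu : x = M u
        · subst hxMu
          obtain ⟨v₀, hb, hf, hc⟩ := hchv1
          refine ⟨v₀, hb, hf, pvChain.step v₀ v u hc huG (by omega) ⟨dv, hdv1, hD1Mu⟩⟩
        · rw [hD1, pvUpd_ne _ _ _ hxMu] at h3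
          obtain ⟨v₀, hb, hf, hc⟩ := hreach x h1 h2 h3
          exact ⟨v₀, hb, hf, pvChain_mono hmono1 hc⟩
      have hgood1 : D1 0 ≠ none → ∃ v₀, (1 ≤ v₀ ∧ v₀ ≤ n) ∧ M v₀ = 0 ∧ pvGood G M D1 v₀ := by
        intro h0
        by_cases hMu0 : M u = 0
        · obtain ⟨v₀, hb, hf, hc⟩ := hchv1
          refine ⟨v₀, hb, hf, pvChain_glue hc (pvGood.term v u huG hMu0 ?_)⟩
          rw [← hMu0, hD1Mu, hdv1]
          rfl
        · have hD10 : D1 0 = D 0 := by rw [hD1, pvUpd_ne _ _ _ (fun he => hMu0 he.symm)]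
          rw [hD10] at h0
          obtain ⟨v₀, hb, hf, hc⟩ := hgood h0
          exact ⟨v₀, hb, hf, pvGood_mono hmono1 h0 hc⟩
      have := ih D1 (q ++ [M u]) (fun u' hu' => hus u' (List.mem_cons_of_mem _ hu'))
        hdv1 hDB1 hq1 hreach1 hgood1 hchv1
      simp only at this
      obtain ⟨i1, i2, i3, i4, i5, i6, i7, i8, i9, i10⟩ := this
      have hw' : pvEqW (D (M u)) none = true := by rw [pvEqW_iff]; exact hw
      rw [hw']
      simp only [if_true]
      refine ⟨?_, i2, ?_, ?_, i5, ?_, by rw [i7, hdv1, hdv], i8, i9, ?_⟩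
      · intro x hx
        rw [i1 x (by rw [hmono1 x hx]; exact hx), hmono1 x hx]
      · rw [i3]
        simp only [List.length_append, List.length_singleton]
        omega
      · obtain ⟨ext, hext⟩ := i4
        exact ⟨M u :: ext, by rw [hext]; simp⟩
      · intro u' hu'
        rcases List.mem_cons.mp hu' with rfl | hu'
        · constructor
          · intro hMu0
            rw [← hMu0]
            rw [i1 (M u') (by rw [hD1Mu]; simp), hD1Mu]
            simp
          · intro _
            rw [i1 (M u') (by rw [hD1Mu]; simp), hD1Mu]
            simp
        · exact i6 u' hu'
      · intro x hx
        by_cases hxMu : x = M u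
        · subst hxMu
          obtain ⟨ext, hext⟩ := i4
          rw [hext]
          exact List.mem_append_left _ (List.mem_append_right _ (by simp))
        · apply i10
          intro hch
          rw [hch, hD1, pvUpd_ne _ _ _ hxMu] at hx
          exact hx rfl
    · -- no write: dist[match[u]] is already set
      have hw2 : pvEqW (D (M u)) none = false := by
        rw [pvEqW_ff]
        intro he
        exact hw (by rw [pvEqW_iff]; exact he)
      rw [hw2]
      simp only [Bool.false_eq_true, if_false]
      have := ih D q (fun u' hu' => hus u' (List.mem_cons_of_mem _ hu')) hdv hDB hq hreach hgood hchv
      simp only at this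
      obtain ⟨i1, i2, i3, i4, i5, i6, i7, i8, i9, i10⟩ := this
      have hwne : D (M u) ≠ none := fun he => by rw [pvEqW_ff] at hw2; exact hw2 he
      refine ⟨i1, i2, i3, i4, i5, ?_, i7, i8, i9, i10⟩
      intro u' hu'
      rcases List.mem_cons.mp hu' with rfl | hu'
      · constructor
        · intro hMu0
          rw [← hMu0, i1 (M u') hwne]
          exact hwne
        · intro _
          rw [i1 (M u') hwne]
          exact hwne
      · exact i6 u' hu'

theorem pvBfsLoop_spec {n m : Int} {G : Int → List Int} (HG : pvHGp n m G) (hn : 0 ≤ n)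
    {M : Int → Int} (hV : pvValid n m G M) :
    ∀ (fuel : Nat) (queue : List Int) (D : Int → Option Int),
      (∀ y ∈ queue, ((1 ≤ y ∧ y ≤ n) ∨ y = 0) ∧ D y ≠ none) →
      (∀ x e, ((1 ≤ x ∧ x ≤ n) ∨ x = 0) → D x = some e → 0 ≤ e ∧ e + (pvTc n D : Int) ≤ n + 1) →
      (queue.length + pvTc n D ≤ fuel) →
      (∀ x, 1 ≤ x → x ≤ n → D x ≠ none →
        ∃ v₀, (1 ≤ v₀ ∧ v₀ ≤ n) ∧ M v₀ = 0 ∧ pvChain G M D v₀ x) →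
      (D 0 ≠ none → ∃ v₀, (1 ≤ v₀ ∧ v₀ ≤ n) ∧ M v₀ = 0 ∧ pvGood G M D v₀) →
      (D 0 = none → ∀ x, 1 ≤ x → x ≤ n → D x ≠ none → x ∈ queue ∨
        (∀ u ∈ G x, (M u = 0 → D 0 ≠ none) ∧ (M u ≠ 0 → D (M u) ≠ none))) →
      (∀ x, D x ≠ none → pvBfsLoop G M fuel queue D x = D x) ∧
      (∀ x e, ((1 ≤ x ∧ x ≤ n) ∨ x = 0) → pvBfsLoop G M fuel queue D x = some e →
        0 ≤ e ∧ e ≤ n + 1) ∧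
      (pvBfsLoop G M fuel queue D 0 ≠ none →
        ∃ v₀, (1 ≤ v₀ ∧ v₀ ≤ n) ∧ M v₀ = 0 ∧ pvGood G M (pvBfsLoop G M fuel queue D) v₀) ∧
      (pvBfsLoop G M fuel queue D 0 = none →
        ∀ x, 1 ≤ x → x ≤ n → pvBfsLoop G M fuel queue D x ≠ none →
        ∀ u ∈ G x, M u ≠ 0 ∧ pvBfsLoop G M fuel queue D (M u) ≠ none) := by
  intro fuel
  induction fuel with
  | zero =>
    intro queue D hq hDB hfuel hreach hgood hproc
    have hD : pvBfsLoop G M 0 queue D = D := by rw [pvBfsLoop]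
    rw [hD]
    have hTc0 : pvTc n D = 0 := by omega
    refine ⟨fun x h => rfl, ?_, hgood, ?_⟩
    · intro x e hb he
      have := hDB x e hb he
      omega
    · intro h0
      have := pvTc_pos hn h0
      omega
  | succ fuel ih =>
    intro queue D hq hDB hfuel hreach hgood hproc
    match queue with
    | [] =>
      have hD : pvBfsLoop G M (fuel + 1) [] D = D := by rw [pvBfsLoop]
      rw [hD]
      refine ⟨fun x h => rfl, ?_, hgood, ?_⟩
      · intro x e hb he
        have := hDB x e hb he
        have := pvTc_le hn D
        omega
      · intro h0 x h1 h2 h3 u hu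
        rcases hproc h0 x h1 h2 h3 with hmem | hpr
        · exact absurd hmem List.not_mem_nil
        · obtain ⟨p1, p2⟩ := hpr u hu
          have hmu : M u ≠ 0 := fun he => absurd (p1 he) (fun hne => hne h0)
          exact ⟨hmu, p2 hmu⟩
    | v :: q =>
      obtain ⟨hvb, hvne⟩ := hq v List.mem_cons_self
      obtain ⟨dv, hdv⟩ : ∃ dv, D v = some dv := by
        cases hDv : D v with
        | none => exact absurd hDv hvne
        | some dv => exact ⟨dv, rfl⟩
      by_cases hlt : pvLt (D v) (D 0) = true
      · -- process v
        have hv0 : v ≠ 0 := by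
          intro he
          have h00 : D 0 = some dv := by rw [← he]; exact hdv
          rw [he, h00] at hlt
          simp [pvLt] at hlt
        have hvb' : 1 ≤ v ∧ v ≤ n := by
          rcases hvb with h | h
          · exact h
          · exact absurd h hv0
        have hchv : ∃ v₀, (1 ≤ v₀ ∧ v₀ ≤ n) ∧ M v₀ = 0 ∧ pvChain G M D v₀ v :=
          hreach v hvb'.1 hvb'.2 hvne
        have hfold := pvBfsFold_spec HG hV hvb'.1 hvb'.2 (G v) D q (fun u hu => hu)
          hdv hDB (fun y hy => hq y (List.mem_cons_of_mem _ hy)) hreach hgood hchv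
        simp only at hfold
        obtain ⟨i1, i2, i3, i4, i5, i6, i7, i8, i9, i10⟩ := hfold
        have hD : pvBfsLoop G M (fuel + 1) (v :: q) D =
            pvBfsLoop G M fuel
              ((G v).foldl (fun st u => if pvEqW (st.1 (M u)) none then
                (pvUpd st.1 (M u) (pvInc (st.1 v)), st.2 ++ [M u]) else st) (D, q)).2
              ((G v).foldl (fun st u => if pvEqW (st.1 (M u)) none then
                (pvUpd st.1 (M u) (pvInc (st.1 v)), st.2 ++ [M u]) else st) (D, q)).1 := by
          rw [pvBfsLoop]
          simp only [hlt, if_true]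
        set st := (G v).foldl (fun st u => if pvEqW (st.1 (M u)) none then
          (pvUpd st.1 (M u) (pvInc (st.1 v)), st.2 ++ [M u]) else st) (D, q) with hst
        have hD0dec : st.1 0 = none → D 0 = none := by
          intro h0
          by_contra hne
          rw [i1 0 hne] at h0
          exact hne h0
        have hfuel2 : st.2.length + pvTc n st.1 ≤ fuel := by
          simp only [List.length_cons] at hfuel
          omega
        have hrec := ih st.2 st.1 i5 i2 hfuel2 i8 i9 ?_
        · rw [hD]
          obtain ⟨r1, r2, r3, r4⟩ := hrec
          refine ⟨?_, r2, r3, r4⟩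
          intro x hx
          rw [r1 x (by rw [i1 x hx]; exact hx), i1 x hx]
        · intro h0 x h1 h2 h3
          have hD0 : D 0 = none := hD0dec h0
          by_cases hch : st.1 x = D x
          · rw [hch] at h3
            rcases hproc hD0 x h1 h2 h3 with hmem | hpr
            · rcases List.mem_cons.mp hmem with rfl | hmem
              · exact Or.inr (i6)
              · obtain ⟨ext, hext⟩ := i4
                exact Or.inl (by rw [hext]; exact List.mem_append_left _ hmem)
            · refine Or.inr ?_
              intro u hu
              obtain ⟨p1, p2⟩ := hpr u hu
              constructor
              · intro he
                exact absurd (p1 he) (fun hne => hne hD0)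
              · intro he
                have := p2 he
                rw [i1 _ this]
                exact this
          · exact Or.inl (i10 x hch)
      · -- skip v
        rw [Bool.not_eq_true] at hlt
        have hD0 : D 0 ≠ none := by
          intro h0
          rw [hdv, h0] at hlt
          simp [pvLt] at hlt
        have hD : pvBfsLoop G M (fuel + 1) (v :: q) D = pvBfsLoop G M fuel q D := by
          rw [pvBfsLoop]
          simp only [hlt]
          simp
        rw [hD]
        exact ih q D (fun y hy => hq y (List.mem_cons_of_mem _ hy)) hDB
          (by simp at hfuel; omega) hreach hgood (fun h0 => absurd h0 hD0)

theorem pvBfsInit {M : Int → Int} :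
    ∀ (L : List Int) (q : List Int) (D : Int → Option Int), L.Nodup →
      ((L.foldl (fun (st : List Int × (Int → Option Int)) v =>
          if M v = 0 then (st.1 ++ [v], pvUpd st.2 v (some 0)) else (st.1, pvUpd st.2 v none))
          (q, D)).1 = q ++ L.filter (fun v => decide (M v = 0))) ∧
      (∀ x, (L.foldl (fun (st : List Int × (Int → Option Int)) v =>
          if M v = 0 then (st.1 ++ [v], pvUpd st.2 v (some 0)) else (st.1, pvUpd st.2 v none))
          (q, D)).2 x = if x ∈ L then (if M x = 0 then some 0 else none) else D x) := by
  intro L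
  induction L with
  | nil =>
    intro q D _
    simp
  | cons a t ih =>
    intro q D hnd
    rw [List.nodup_cons] at hnd
    rw [List.foldl_cons]
    by_cases ha : M a = 0
    · rw [if_pos ha]
      obtain ⟨j1, j2⟩ := ih (q ++ [a]) (pvUpd D a (some 0)) hnd.2
      constructor
      · rw [j1, List.filter_cons, if_pos (by simp [ha])]
        simp
      · intro x
        rw [j2 x]
        by_cases hxt : x ∈ t
        · rw [if_pos hxt, if_pos (List.mem_cons_of_mem _ hxt)]
        · rw [if_neg hxt]
          by_cases hxa : x = a
          · subst hxa
            rw [if_pos List.mem_cons_self, pvUpd_self, if_pos ha]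
          · rw [if_neg (by intro h; rcases List.mem_cons.mp h with h | h; exact hxa h; exact hxt h),
              pvUpd_ne _ _ _ hxa]
    · rw [if_neg ha]
      obtain ⟨j1, j2⟩ := ih q (pvUpd D a none) hnd.2
      constructor
      · rw [j1, List.filter_cons, if_neg (by simp [ha])]
      · intro x
        rw [j2 x]
        by_cases hxt : x ∈ t
        · rw [if_pos hxt, if_pos (List.mem_cons_of_mem _ hxt)]
        · rw [if_neg hxt]
          by_cases hxa : x = a
          · subst hxa
            rw [if_pos List.mem_cons_self, pvUpd_self, if_neg ha]
          · rw [if_neg (by intro h; rcases List.mem_cons.mp h with h | h; exact hxa h; exact hxt h),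
              pvUpd_ne _ _ _ hxa]

theorem pvBfs_spec {n m : Int} {G : Int → List Int} (HG : pvHGp n m G) (hn : 0 ≤ n)
    {M : Int → Int} (hV : pvValid n m G M) (D0 : Int → Option Int) :
    (∀ x e, ((1 ≤ x ∧ x ≤ n) ∨ x = 0) → (pvBfs G M D0 n).2 x = some e → 0 ≤ e ∧ e ≤ n + 1) ∧
    (∀ v, 1 ≤ v → v ≤ n → M v = 0 → (pvBfs G M D0 n).2 v = some 0) ∧
    ((pvBfs G M D0 n).1 = true →
      ∃ v₀, (1 ≤ v₀ ∧ v₀ ≤ n) ∧ M v₀ = 0 ∧ pvGood G M (pvBfs G M D0 n).2 v₀) ∧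
    ((pvBfs G M D0 n).1 = false → ∀ x, 1 ≤ x → x ≤ n → (pvBfs G M D0 n).2 x ≠ none →
      ∀ u ∈ G x, M u ≠ 0 ∧ (pvBfs G M D0 n).2 (M u) ≠ none) ∧
    ((pvBfs G M D0 n).1 = false ↔ (pvBfs G M D0 n).2 0 = none) := by
  obtain ⟨j1, j2⟩ := pvBfsInit (M := M) (PySem.List.pyRange 1 (n + 1) 1) [] D0
    (PySem.List.nodup_pyRange_one 1 (n + 1))
  simp only [pvBfs]
  set init := (PySem.List.pyRange 1 (n + 1) 1).foldl
    (fun (st : List Int × (Int → Option Int)) v =>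
      if M v = 0 then (st.1 ++ [v], pvUpd st.2 v (some 0)) else (st.1, pvUpd st.2 v none))
    ([], D0) with hinit
  set D1 := pvUpd init.2 0 none with hD1
  have hD1eq : ∀ x, D1 x = if x = 0 then none else
      (if x ∈ PySem.List.pyRange 1 (n + 1) 1 then (if M x = 0 then some 0 else none) else D0 x) := by
    intro x
    by_cases hx0 : x = 0
    · subst hx0
      rw [hD1, pvUpd_self, if_pos rfl]
    · rw [hD1, pvUpd_ne _ _ _ hx0, j2 x, if_neg hx0]
  have hq1 : ∀ y ∈ init.1, ((1 ≤ y ∧ y ≤ n) ∨ y = 0) ∧ D1 y ≠ none := by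
    intro y hy
    rw [j1] at hy
    simp only [List.nil_append] at hy
    have hym := List.mem_of_mem_filter hy
    rw [PySem.List.mem_pyRange_one] at hym
    have hyf : M y = 0 := by
      have := List.of_mem_filter hy
      simpa using this
    refine ⟨Or.inl ⟨by omega, by omega⟩, ?_⟩
    rw [hD1eq y, if_neg (by omega), if_pos (by rw [PySem.List.mem_pyRange_one]; omega), if_pos hyf]
    simp
  have hDB1 : ∀ x e, ((1 ≤ x ∧ x ≤ n) ∨ x = 0) → D1 x = some e →
      0 ≤ e ∧ e + (pvTc n D1 : Int) ≤ n + 1 := by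
    intro x e hb he
    rw [hD1eq x] at he
    have hTc := pvTc_le hn D1
    rcases hb with hb | hb
    · rw [if_neg (by omega), if_pos (by rw [PySem.List.mem_pyRange_one]; omega)] at he
      by_cases hf : M x = 0
      · rw [if_pos hf] at he
        injection he with he
        -- e = 0; need Tc ≤ n + 1 minus: 0 + Tc ≤ n + 1
        constructor
        · omega
        · -- pvTc counts none entries among 0..n; key 0 is none, and x (some) is not
          omega
      · rw [if_neg hf] at he
        exact absurd he (by simp)
    · rw [if_pos hb] at he
      exact absurd he (by simp)
  have hfree1 : ∀ v, 1 ≤ v → v ≤ n → M v = 0 → D1 v = some 0 := by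
    intro v h1 h2 hf
    rw [hD1eq v, if_neg (by omega), if_pos (by rw [PySem.List.mem_pyRange_one]; omega), if_pos hf]
  have hreach1 : ∀ x, 1 ≤ x → x ≤ n → D1 x ≠ none →
      ∃ v₀, (1 ≤ v₀ ∧ v₀ ≤ n) ∧ M v₀ = 0 ∧ pvChain G M D1 v₀ x := by
    intro x h1 h2 h3
    refine ⟨x, ⟨h1, h2⟩, ?_, pvChain.base x⟩
    by_contra hf
    rw [hD1eq x, if_neg (by omega), if_pos (by rw [PySem.List.mem_pyRange_one]; omega),
      if_neg hf] at h3
    exact h3 rfl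
  have hD10 : D1 0 = none := by rw [hD1, pvUpd_self]
  have hfuel : init.1.length + pvTc n D1 ≤ 2 * n.toNat + 2 := by
    have hlen : init.1.length ≤ n.toNat := by
      rw [j1]
      simp only [List.nil_append]
      have := List.length_filter_le (fun v => decide (M v = 0)) (PySem.List.pyRange 1 (n + 1) 1)
      have hl := PySem.List.length_pyRange_one (a := 1) (b := n + 1)
      omega
    have := pvTc_le hn D1
    omega
  have hproc1 : D1 0 = none → ∀ x, 1 ≤ x → x ≤ n → D1 x ≠ none → x ∈ init.1 ∨
      (∀ u ∈ G x, (M u = 0 → D1 0 ≠ none) ∧ (M u ≠ 0 → D1 (M u) ≠ none)) := by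
    intro _ x h1 h2 h3
    left
    rw [j1]
    simp only [List.nil_append]
    have hf : M x = 0 := by
      by_contra hf
      rw [hD1eq x, if_neg (by omega), if_pos (by rw [PySem.List.mem_pyRange_one]; omega),
        if_neg hf] at h3
      exact h3 rfl
    exact List.mem_filter.mpr ⟨by rw [PySem.List.mem_pyRange_one]; omega, by simp [hf]⟩
  obtain ⟨r1, r2, r3, r4⟩ := pvBfsLoop_spec HG hn hV (2 * n.toNat + 2) init.1 D1
    hq1 hDB1 hfuel hreach1 (fun h0 => absurd hD10 h0) hproc1
  set Df := pvBfsLoop G M (2 * n.toNat + 2) init.1 D1 with hDf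
  have hbool : (!pvEqW (Df 0) none) = false ↔ Df 0 = none := by
    cases hDf0 : Df 0 <;> simp [pvEqW]
  refine ⟨r2, ?_, ?_, ?_, hbool⟩
  · intro v h1 h2 hf
    rw [r1 v (by rw [hfree1 v h1 h2 hf]; simp), hfree1 v h1 h2 hf]
  · intro htrue
    apply r3
    intro h0
    rw [hbool.mpr h0] at htrue
    simp at htrue
  · intro hfalse
    exact r4 (hbool.mp hfalse)

-- ---------- the per-phase for-loop and the outer while-loop ----------

theorem pvMCnt_succ {n : Int} {M M' : Int → Int} {v : Int} (hv1 : 1 ≤ v) (hv2 : v ≤ n)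
    (hfree : M v = 0) (hM' : M' v ≠ 0)
    (hpres : ∀ w, 1 ≤ w → w ≤ n → w ≠ v → (M' w ≠ 0 ↔ M w ≠ 0)) :
    pvMCnt n M' = pvMCnt n M + 1 := by
  unfold pvMCnt
  refine pv_countP_flip (PySem.List.nodup_pyRange_one 1 (n + 1))
    (v := v) (by rw [PySem.List.mem_pyRange_one]; omega) ?_ ?_ ?_
  · intro w hw hwv
    rw [PySem.List.mem_pyRange_one] at hw
    exact decide_eq_decide.mpr (hpres w (by omega) (by omega) hwv)
  · simp only [decide_eq_true_eq]
    exact hM'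
  · simp [hfree]

theorem pvMCnt_le {n : Int} (hn : 0 ≤ n) (M : Int → Int) : (pvMCnt n M : Int) ≤ n := by
  unfold pvMCnt
  have h1 := List.countP_le_length (l := PySem.List.pyRange 1 (n + 1) 1)
    (p := fun v => decide (M v ≠ 0))
  have h2 := PySem.List.length_pyRange_one (a := 1) (b := n + 1)
  omega

theorem pvPhaseFold {n m : Int} {G : Int → List Int} (HG : pvHGp n m G) (hn : 0 ≤ n)
    (hm0 : 0 ≤ m) :
    ∀ (L : List Int) (M : Int → Int) (D : Int → Option Int) (cnt : Int),
      L.Nodup → (∀ v ∈ L, 1 ≤ v ∧ v ≤ n) →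
      pvValid n m G M → pvDB n D → D 0 ≠ none →
      (∀ w ∈ L, M w = 0 → D w = some 0) →
      (let st := L.foldl (fun st v =>
        if st.1 v = 0 then
          match pvDfs G (n.toNat + 2) st.1 st.2.1 v with
          | (true, m', d') => (m', d', st.2.2 + 1)
          | (false, m', d') => (m', d', st.2.2)
        else st) (M, D, cnt)
       pvValid n m G st.1 ∧
       (cnt = (pvMCnt n M : Int) → st.2.2 = (pvMCnt n st.1 : Int)) ∧
       cnt ≤ st.2.2 ∧
       ((∃ v₀ ∈ L, M v₀ = 0 ∧ pvGood G M D v₀) → cnt + 1 ≤ st.2.2)) := by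
  intro L
  induction L with
  | nil =>
    intro M D cnt _ _ hV _ _ _
    simp only [List.foldl_nil]
    exact ⟨hV, fun h => h, le_refl cnt, by simp⟩
  | cons v L ih =>
    intro M D cnt hnd hb hV hDB hD0 hfree
    rw [List.nodup_cons] at hnd
    have hvb := hb v List.mem_cons_self
    rw [List.foldl_cons]
    by_cases hMv : M v = 0
    · rw [if_pos hMv]
      have hd : D v = some 0 := hfree v List.mem_cons_self hMv
      have hP := (pvDfs_main HG hm0 (n.toNat + 2)).1 M D v 0 hV hDB hD0 hvb.1 hvb.2 hd
        (by push_cast; omega)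
      rcases hdfs : pvDfs G (n.toNat + 2) M D v with ⟨b, M', D'⟩
      rw [hdfs] at hP
      obtain ⟨hf, hs, hc⟩ := hP
      cases b
      · -- dfs failed
        obtain ⟨f1, f2, f3, f4⟩ := hf rfl
        simp only at f1 f2 f3 f4
        simp only [f1]
        have hkeep : ∀ w, M w = 0 → w ≠ v → D' w = D w := by
          intro w hw hwv
          by_contra hne
          obtain ⟨_, _, g3, _⟩ := f2 w hne
          rcases g3 with g3 | g3
          · exact hwv g3
          · exact g3 hw
        have := ih M D' cnt hnd.2 (fun w hw => hb w (List.mem_cons_of_mem _ hw)) hV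
          (pvDB_marks hDB f2) (by rw [pvMarksD_keep0 f2]; exact hD0)
          (fun w hw hfw => by
            rw [hkeep w hfw (fun he => hnd.1 (he ▸ hw))]
            exact hfree w (List.mem_cons_of_mem _ hw) hfw)
        simp only at this
        obtain ⟨j1, j2, j3, j4⟩ := this
        refine ⟨j1, j2, j3, ?_⟩
        rintro ⟨v₀, hv₀m, hv₀f, hv₀g⟩
        rcases List.mem_cons.mp hv₀m with rfl | hv₀m
        · exact absurd (hc hv₀g) (by simp)
        · exact j4 ⟨v₀, hv₀m, hv₀f, f3 v₀ hv₀g⟩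
      · -- dfs succeeded
        obtain ⟨s1, s2⟩ := hs rfl
        simp only at s1 s2
        simp only [hdfs]
        obtain ⟨a1, a2, a3, a4, a5, a6, a7, a8, a9⟩ := s1
        have hV' : pvValid n m G M' := by
          refine ⟨fun w h1 h2 => a4 w h1 h2, ?_, ?_⟩
          · intro u h1 h2 h3
            exact a5 u h1 h2 (by rw [hMv]; omega) h3
          · intro x hx
            rw [a7 x hx]
            exact hV.2.2 x hx
        have hcount : pvMCnt n M' = pvMCnt n M + 1 := pvMCnt_succ hvb.1 hvb.2 hMv a1 a3
        have hkeep : ∀ w ∈ L, M' w = 0 → D' w = D w := by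
          intro w hwL hw
          have hwv : w ≠ v := fun he => hnd.1 (he ▸ hwL)
          have hwb := hb w (List.mem_cons_of_mem _ hwL)
          have hMw : M w = 0 := by
            by_contra hMw
            exact hMw (by_contra (fun h2 => by
              have := (a3 w hwb.1 hwb.2 hwv).mpr hMw
              exact this hw))
          by_contra hne
          obtain ⟨_, hb2, g3, e, g4, g5⟩ := s2 w hne
          rcases g3 with g3 | g3
          · omega
          · exact g3 hMw
        have := ih M' D' (cnt + 1) hnd.2 (fun w hw => hb w (List.mem_cons_of_mem _ hw)) hV'
          (pvDB_marks hDB s2) (by rw [pvMarksD_keep0 s2]; exact hD0)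
          (fun w hw hfw => by
            rw [hkeep w hw hfw]
            have hwv : w ≠ v := fun he => hnd.1 (he ▸ hw)
            have hwb := hb w (List.mem_cons_of_mem _ hw)
            have hMw : M w = 0 := by
              by_contra hMw
              have := (a3 w hwb.1 hwb.2 hwv).mpr hMw
              exact this hfw
            exact hfree w (List.mem_cons_of_mem _ hw) hMw)
        simp only at this
        obtain ⟨j1, j2, j3, j4⟩ := this
        refine ⟨j1, ?_, by omega, fun _ => by omega⟩
        intro hcnt
        apply j2
        rw [hcnt, hcount]
        push_cast
        ring
    · rw [if_neg hMv]
      have := ih M D cnt hnd.2 (fun w hw => hb w (List.mem_cons_of_mem _ hw)) hV hDB hD0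
        (fun w hw hfw => hfree w (List.mem_cons_of_mem _ hw) hfw)
      simp only at this
      obtain ⟨j1, j2, j3, j4⟩ := this
      refine ⟨j1, j2, j3, ?_⟩
      rintro ⟨v₀, hv₀m, hv₀f, hv₀g⟩
      rcases List.mem_cons.mp hv₀m with rfl | hv₀m
      · exact absurd hv₀f hMv
      · exact j4 ⟨v₀, hv₀m, hv₀f, hv₀g⟩

theorem pvHk_spec {n m : Int} {G : Int → List Int} (HG : pvHGp n m G) (hn : 0 ≤ n) (hm0 : 0 ≤ m) :
    ∀ (fuel : Nat) (M : Int → Int) (D : Int → Option Int) (cnt : Int),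
      pvValid n m G M → cnt = (pvMCnt n M : Int) → n + 1 ≤ (fuel : Int) + cnt →
      ∃ (Mf : Int → Int) (Df : Int → Option Int), pvValid n m G Mf ∧ pvHkLoop G n fuel M D cnt = (pvMCnt n Mf : Int) ∧
        (∀ v, 1 ≤ v → v ≤ n → Mf v = 0 → Df v ≠ none) ∧
        (∀ x, 1 ≤ x → x ≤ n → Df x ≠ none → ∀ u ∈ G x, Mf u ≠ 0 ∧ Df (Mf u) ≠ none) := by
  intro fuel
  induction fuel with
  | zero =>
    intro M D cnt hV hcnt hfuel
    exfalso
    have := pvMCnt_le hn M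
    push_cast at hfuel
    omega
  | succ fuel ih =>
    intro M D cnt hV hcnt hfuel
    obtain ⟨b1, b2, b3, b4, b5⟩ := pvBfs_spec HG hn hV D
    have hunf : pvHkLoop G n (fuel + 1) M D cnt =
        (if (pvBfs G M D n).1 then
          pvHkLoop G n fuel (pvPhase G n (M, (pvBfs G M D n).2, cnt)).1
            (pvPhase G n (M, (pvBfs G M D n).2, cnt)).2.1
            (pvPhase G n (M, (pvBfs G M D n).2, cnt)).2.2
        else cnt) := by
      rw [pvHkLoop]
    by_cases hb : (pvBfs G M D n).1 = true
    · rw [hunf, if_pos hb]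
      simp only [pvPhase]
      have hD0 : (pvBfs G M D n).2 0 ≠ none := by
        intro h0
        rw [b5.mpr h0] at hb
        simp at hb
      obtain ⟨v₀, hv₀b, hv₀f, hv₀g⟩ := b3 hb
      have hphase := pvPhaseFold HG hn hm0 (PySem.List.pyRange 1 (n + 1) 1) M
        (pvBfs G M D n).2 cnt (PySem.List.nodup_pyRange_one 1 (n + 1))
        (fun w hw => by rw [PySem.List.mem_pyRange_one] at hw; omega)
        hV (fun x e hxb hxe => b1 x e hxb hxe) hD0
        (fun w hw hfw => by
          rw [PySem.List.mem_pyRange_one] at hw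
          exact b2 w (by omega) (by omega) hfw)
      simp only at hphase
      obtain ⟨j1, j2, j3, j4⟩ := hphase
      have hprog := j4 ⟨v₀, by rw [PySem.List.mem_pyRange_one]; omega, hv₀f, hv₀g⟩
      exact ih _ _ _ j1 (j2 hcnt) (by push_cast at hfuel ⊢; omega)
    · rw [Bool.not_eq_true] at hb
      rw [hunf, if_neg (by rw [hb]; simp)]
      exact ⟨M, (pvBfs G M D n).2, hV, hcnt, fun v h1 h2 hf => by rw [b2 v h1 h2 hf]; simp,
        b4 hb⟩

-- ---------- from the final matching to pvM, and the König-style bound ----------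

theorem pv_map_getD_range {α : Type} (l : List α) (d : α) :
    (List.range l.length).map (fun i => l.getD i d) = l := by
  apply List.ext_getElem (by simp)
  intro i h1 h2
  simp only [List.getElem_map, List.getElem_range]
  exact List.getD_eq_getElem l d h2

theorem pv_getD_subperm {α : Type} [DecidableEq α] (l : List α) (d : α) (ixs : List Nat)
    (hnd : ixs.Nodup) (hb : ∀ i ∈ ixs, i < l.length) :
    List.Subperm (ixs.map (fun i => l.getD i d)) l := by
  rw [List.subperm_ext_iff]
  intro x hx
  have h1 : (ixs.map (fun i => l.getD i d)).count x
      = ixs.countP (fun i => l.getD i d == x) := List.countP_map ..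
  have h2 : l.count x = (List.range l.length).countP (fun i => l.getD i d == x) := by
    conv_lhs => rw [← pv_map_getD_range l d]
    exact List.countP_map ..
  rw [h1, h2]
  exact (List.subperm_of_subset hnd (fun i hi => List.mem_range.mpr (hb i hi))).countP_le _

theorem pv_perm_pull {α β : Type} [DecidableEq α] [DecidableEq β] (f : β → α) :
    ∀ (xs : List α) (ys : List β), xs.Perm (ys.map f) →
      ∃ ys' : List β, ys'.Perm ys ∧ xs = ys'.map f := by
  intro xs
  induction xs with
  | nil =>
    intro ys h
    have h0 : ys = [] := by
      have := h.symm.length_eq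
      simp only [List.length_map, List.length_nil] at this
      exact List.length_eq_zero_iff.mp this
    exact ⟨[], by rw [h0], by simp⟩
  | cons x xs ihx =>
    intro ys h
    have hx : x ∈ ys.map f := h.mem_iff.mp List.mem_cons_self
    obtain ⟨y, hy, hfy⟩ := List.mem_map.mp hx
    have h2 : xs.Perm ((ys.map f).erase x) := (List.cons_perm_iff_perm_erase.mp h).2
    have h3 : ((ys.map f).erase x).Perm ((ys.erase y).map f) := by
      have hp : ys.Perm (y :: ys.erase y) := List.perm_cons_erase hy
      have := (hp.map f).erase x
      rw [List.map_cons, hfy] at this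
      simpa using this
    obtain ⟨ys', hys', hmap⟩ := ihx (ys.erase y) (h2.trans h3)
    refine ⟨y :: ys', ?_, by rw [List.map_cons, hfy, hmap]⟩
    exact (hys'.cons y).trans (List.perm_cons_erase hy).symm

theorem pv_pairing {α β : Type} [DecidableEq α] [DecidableEq β] (dα : α) (dβ : β)
    {P : List (α × β)} {cl : List α} {hs : List β}
    (h1 : List.Subperm (P.map Prod.fst) cl) (h2 : List.Subperm (P.map Prod.snd) hs) :
    ∃ (ixs jxs : List Nat), ixs.Nodup ∧ jxs.Nodup ∧
      ixs.length = P.length ∧ jxs.length = P.length ∧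
      (∀ i ∈ ixs, i < cl.length) ∧ (∀ j ∈ jxs, j < hs.length) ∧
      ixs.map (fun i => cl.getD i dα) = P.map Prod.fst ∧
      jxs.map (fun j => hs.getD j dβ) = P.map Prod.snd := by
  obtain ⟨l1, hp1, hsub1⟩ := h1
  obtain ⟨l2, hp2, hsub2⟩ := h2
  obtain ⟨is1, his1, hnd1⟩ := List.sublist_eq_map_getElem hsub1
  obtain ⟨is2, his2, hnd2⟩ := List.sublist_eq_map_getElem hsub2
  have e1 : (P.map Prod.fst).Perm (is1.map (fun x => cl[x])) := by
    rw [← his1]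
    exact hp1.symm
  have e2 : (P.map Prod.snd).Perm (is2.map (fun x => hs[x])) := by
    rw [← his2]
    exact hp2.symm
  obtain ⟨is1', hperm1, hmap1⟩ := pv_perm_pull _ _ _ e1
  obtain ⟨is2', hperm2, hmap2⟩ := pv_perm_pull _ _ _ e2
  refine ⟨is1'.map Fin.val, is2'.map Fin.val, ?_, ?_, ?_, ?_, ?_, ?_, ?_, ?_⟩
  · have hnd : is1'.Nodup := (hperm1.nodup_iff).mpr (List.Pairwise.imp Fin.ne_of_lt hnd1)
    exact hnd.map (fun a b h => Fin.val_injective h)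
  · have hnd : is2'.Nodup := (hperm2.nodup_iff).mpr (List.Pairwise.imp Fin.ne_of_lt hnd2)
    exact hnd.map (fun a b h => Fin.val_injective h)
  · have := hmap1
    have hlen := congrArg List.length hmap1
    simp only [List.length_map] at hlen ⊢
    omega
  · have hlen := congrArg List.length hmap2
    simp only [List.length_map] at hlen ⊢
    omega
  · intro i hi
    obtain ⟨a, _, rfl⟩ := List.mem_map.mp hi
    exact a.isLt
  · intro j hj
    obtain ⟨a, _, rfl⟩ := List.mem_map.mp hj
    exact a.isLt
  · rw [List.map_map, hmap1]
    apply List.map_congr_left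
    intro a _
    exact List.getD_eq_getElem cl dα a.isLt
  · rw [List.map_map, hmap2]
    apply List.map_congr_left
    intro a _
    exact List.getD_eq_getElem hs dβ a.isLt

-- ---------- A-side summary (proved further below) ----------

theorem pvValid_zero {n m : Int} {G : Int → List Int} : pvValid n m G (fun _ => 0) :=
  ⟨fun _ _ _ h => absurd rfl h, fun _ _ _ h => absurd rfl h, fun _ _ => rfl⟩

theorem pvA_run (cl hs : List (Int × Int)) :
    ∃ (Mf : Int → Int) (Df : Int → Option Int),
      pvValid (cl.length : Int) (hs.length : Int) (pvBuildGraph cl hs cl.length) Mf ∧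
      real_estate_broker cl hs = (pvMCnt (cl.length : Int) Mf : Int) ∧
      (∀ v, 1 ≤ v → v ≤ (cl.length : Int) → Mf v = 0 → Df v ≠ none) ∧
      (∀ x, 1 ≤ x → x ≤ (cl.length : Int) → Df x ≠ none →
        ∀ u ∈ pvBuildGraph cl hs cl.length x, Mf u ≠ 0 ∧ Df (Mf u) ≠ none) := by
  have HG := pvG_HG cl hs
  have hzero : (0 : Int) = (pvMCnt (cl.length : Int) (fun _ => (0 : Int)) : Int) := by
    unfold pvMCnt
    rw [List.countP_eq_zero.mpr (by intro a _; simp)]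
    simp
  obtain ⟨Mf, Df, h1, h2, h3, h4⟩ := pvHk_spec HG (Int.natCast_nonneg _) (Int.natCast_nonneg _)
    (((cl.length : Int)).toNat + 1) (fun _ => 0) (fun _ => none) 0 pvValid_zero hzero
    (by rw [Int.toNat_natCast]; push_cast; omega)
  refine ⟨Mf, Df, h1, ?_, h3, h4⟩
  simp only [real_estate_broker]
  exact h2

theorem pvA_ach (cl hs : List (Int × Int)) :
    ∃ k : Nat, real_estate_broker cl hs = (k : Int) ∧ pvM cl hs k := by
  obtain ⟨Mf, Df, hV, hres, hfree, hproc⟩ := pvA_run cl hs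
  refine ⟨pvMCnt (cl.length : Int) Mf, hres, ?_⟩
  set n : Int := (cl.length : Int) with hn
  set L := (PySem.List.pyRange 1 (n + 1) 1).filter (fun v => decide (Mf v ≠ 0)) with hL
  have hLk : pvMCnt n Mf = L.length := by
    unfold pvMCnt
    rw [List.countP_eq_length_filter]
  have hmem : ∀ v ∈ L, (1 ≤ v ∧ v ≤ n) ∧ Mf v ≠ 0 := by
    intro v hv
    have h1 := List.mem_of_mem_filter hv
    rw [PySem.List.mem_pyRange_one] at h1
    have h2 := List.of_mem_filter hv
    simp only [decide_eq_true_eq] at h2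
    exact ⟨⟨by omega, by omega⟩, h2⟩
  have hedge : ∀ v ∈ L, ∃ j : Nat, j < hs.length ∧ Mf v = n + ((j : Int) + 1) ∧
      pvCompat (cl.getD (v - 1).toNat (0, 0)) (hs.getD j (0, 0)) := by
    intro v hv
    obtain ⟨⟨h1, h2⟩, h3⟩ := hmem v hv
    have := (hV.1 v h1 h2 h3).1
    obtain ⟨_, j, hj, hju, hjc⟩ := pvG_mem this
    exact ⟨j, hj, hju, hjc⟩
  have hLnd : L.Nodup := (PySem.List.nodup_pyRange_one 1 (n + 1)).filter _
  refine ⟨L.map (fun v => (cl.getD (v - 1).toNat (0, 0),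
    hs.getD (Mf v - n - 1).toNat (0, 0))), by simp [hLk], ?_, ?_, ?_⟩
  · have heq : (L.map (fun v => (cl.getD (v - 1).toNat (0, 0),
        hs.getD (Mf v - n - 1).toNat (0, 0)))).map Prod.fst
        = (L.map (fun v => (v - 1).toNat)).map (fun i => cl.getD i (0, 0)) := by
      simp only [List.map_map]
      rfl
    rw [heq]
    apply pv_getD_subperm
    · apply List.Nodup.map_on ?_ hLnd
      intro x hx y hy hxy
      obtain ⟨⟨hx1, hx2⟩, _⟩ := hmem x hx
      obtain ⟨⟨hy1, hy2⟩, _⟩ := hmem y hy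
      omega
    · intro i hi
      obtain ⟨v, hv, rfl⟩ := List.mem_map.mp hi
      obtain ⟨⟨h1, h2⟩, _⟩ := hmem v hv
      omega
  · have heq : (L.map (fun v => (cl.getD (v - 1).toNat (0, 0),
        hs.getD (Mf v - n - 1).toNat (0, 0)))).map Prod.snd
        = (L.map (fun v => (Mf v - n - 1).toNat)).map (fun j => hs.getD j (0, 0)) := by
      simp only [List.map_map]
      rfl
    rw [heq]
    apply pv_getD_subperm
    · apply List.Nodup.map_on ?_ hLnd
      intro x hx y hy hxy
      obtain ⟨⟨hx1, hx2⟩, hx3⟩ := hmem x hx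
      obtain ⟨⟨hy1, hy2⟩, hy3⟩ := hmem y hy
      obtain ⟨jx, hjx, hjux, _⟩ := hedge x hx
      obtain ⟨jy, hjy, hjuy, _⟩ := hedge y hy
      have hMxy : Mf x = Mf y := by omega
      have e1 := (hV.1 x hx1 hx2 hx3).2
      have e2 := (hV.1 y hy1 hy2 hy3).2
      rw [← e1, hMxy, e2]
    · intro j hj
      obtain ⟨v, hv, rfl⟩ := List.mem_map.mp hj
      obtain ⟨jv, hjv, hju, _⟩ := hedge v hv
      omega
  · intro q hq
    obtain ⟨v, hv, rfl⟩ := List.mem_map.mp hq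
    obtain ⟨j, hj, hju, hjc⟩ := hedge v hv
    have : (Mf v - n - 1).toNat = j := by omega
    rw [this]
    exact hjc

theorem pvA_max (cl hs : List (Int × Int)) (k : Nat) (h : pvM cl hs k) :
    (k : Int) ≤ real_estate_broker cl hs := by
  obtain ⟨Mf, Df, hV, hres, hfree, hproc⟩ := pvA_run cl hs
  obtain ⟨P, hlen, hfst, hsnd, hcompat⟩ := h
  obtain ⟨ixs, jxs, hnd1, hnd2, hl1, hl2, hb1, hb2, hm1, hm2⟩ := pv_pairing (0, 0) (0, 0) hfst hsnd
  set n : Int := (cl.length : Int) with hn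
  set m : Int := (hs.length : Int) with hm
  set G := pvBuildGraph cl hs cl.length with hG
  set L0 := ixs.zip jxs with hL0
  have hL0len : L0.length = P.length := by
    rw [hL0, List.length_zip]
    omega
  have hkey : ∀ p ∈ L0, p.1 < cl.length ∧ p.2 < hs.length ∧
      pvCompat (cl.getD p.1 (0, 0)) (hs.getD p.2 (0, 0)) := by
    intro p hp
    obtain ⟨k', hk', hpk⟩ := List.mem_iff_getElem.mp hp
    have hkx : k' < ixs.length := by rw [hL0, List.length_zip] at hk'; omega
    have hky : k' < jxs.length := by rw [hL0, List.length_zip] at hk'; omega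
    have hkP : k' < P.length := by omega
    have hpk' : p = (ixs[k'], jxs[k']) := by
      rw [← hpk]
      exact List.getElem_zip
    have e1 : cl.getD ixs[k'] (0, 0) = P[k'].1 := by
      have hc := congrArg (fun l => l[k']?) hm1
      simp only [List.getElem?_map] at hc
      rw [List.getElem?_eq_getElem hkx, List.getElem?_eq_getElem hkP] at hc
      simp only [Option.map_some] at hc
      injection hc
    have e2 : hs.getD jxs[k'] (0, 0) = P[k'].2 := by
      have hc := congrArg (fun l => l[k']?) hm2
      simp only [List.getElem?_map] at hc
      rw [List.getElem?_eq_getElem hky, List.getElem?_eq_getElem hkP] at hc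
      simp only [Option.map_some] at hc
      injection hc
    have hcpt := hcompat P[k'] (List.getElem_mem hkP)
    rw [hpk']
    refine ⟨hb1 _ (List.getElem_mem hkx), hb2 _ (List.getElem_mem hky), ?_⟩
    simp only
    rw [e1, e2]
    exact ⟨hcpt.1, hcpt.2⟩
  have hedge : ∀ p ∈ L0, (n + ((p.2 : Int) + 1)) ∈ G ((p.1 : Int) + 1) := by
    intro p hp
    obtain ⟨hpc, hph, hpcpt⟩ := hkey p hp
    apply pvG_mem' (by omega) (by omega) hph
    have : ((p.1 : Int) + 1 - 1).toNat = p.1 := by omega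
    rw [this]
    exact hpcpt
  have hfact : ∀ p ∈ L0,
      (Df ((p.1 : Int) + 1) = none → Mf ((p.1 : Int) + 1) ≠ 0 ∧ 1 ≤ (p.1 : Int) + 1 ∧ (p.1 : Int) + 1 ≤ n) ∧
      (Df ((p.1 : Int) + 1) ≠ none →
        Mf (n + ((p.2 : Int) + 1)) ≠ 0 ∧ Df (Mf (n + ((p.2 : Int) + 1))) ≠ none ∧
        Mf (Mf (n + ((p.2 : Int) + 1))) = n + ((p.2 : Int) + 1) ∧
        1 ≤ Mf (n + ((p.2 : Int) + 1)) ∧ Mf (n + ((p.2 : Int) + 1)) ≤ n) := by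
    intro p hp
    obtain ⟨hpc, hph, _⟩ := hkey p hp
    constructor
    · intro hnone
      refine ⟨?_, by omega, by omega⟩
      intro hf
      exact (hfree ((p.1 : Int) + 1) (by omega) (by omega) hf) hnone
    · intro hne
      obtain ⟨hMu0, hMuD⟩ := hproc ((p.1 : Int) + 1) (by omega) (by omega) hne _ (hedge p hp)
      have hhv := hV.2.1 (n + ((p.2 : Int) + 1)) (by omega) (by omega) hMu0
      exact ⟨hMu0, hMuD, hhv.2.1, hhv.2.2.1, hhv.2.2.2⟩
  set tf : Nat × Nat → Int := fun p =>
    if Df ((p.1 : Int) + 1) = none then (p.1 : Int) + 1 else Mf (n + ((p.2 : Int) + 1)) with htf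
  set ML := (PySem.List.pyRange 1 (n + 1) 1).filter (fun v => decide (Mf v ≠ 0)) with hML
  have hL0fst : L0.map Prod.fst = ixs := List.map_fst_zip (by omega)
  have hL0snd : L0.map Prod.snd = jxs := List.map_snd_zip (by omega)
  have hL0nd : L0.Nodup := List.Nodup.of_map Prod.fst (by rw [hL0fst]; exact hnd1)
  have hfst_inj : ∀ p ∈ L0, ∀ q ∈ L0, p.1 = q.1 → p = q :=
    List.inj_on_of_nodup_map (by rw [hL0fst]; exact hnd1)
  have hsnd_inj : ∀ p ∈ L0, ∀ q ∈ L0, p.2 = q.2 → p = q :=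
    List.inj_on_of_nodup_map (by rw [hL0snd]; exact hnd2)
  have htnd : (L0.map tf).Nodup := by
    apply List.Nodup.map_on ?_ hL0nd
    intro p hp q hq heq
    rw [htf] at heq
    simp only at heq
    by_cases hpn : Df ((p.1 : Int) + 1) = none <;> by_cases hqn : Df ((q.1 : Int) + 1) = none
    · rw [if_pos hpn, if_pos hqn] at heq
      exact hfst_inj p hp q hq (by omega)
    · rw [if_pos hpn, if_neg hqn] at heq
      obtain ⟨_, hD, _, _, _⟩ := (hfact q hq).2 hqn
      rw [← heq] at hD
      exact absurd hpn hD
    · rw [if_neg hpn, if_pos hqn] at heq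
      obtain ⟨_, hD, _, _, _⟩ := (hfact p hp).2 hpn
      rw [heq] at hD
      exact absurd hqn hD
    · rw [if_neg hpn, if_neg hqn] at heq
      obtain ⟨_, _, hMp, _, _⟩ := (hfact p hp).2 hpn
      obtain ⟨_, _, hMq, _, _⟩ := (hfact q hq).2 hqn
      have : n + ((p.2 : Int) + 1) = n + ((q.2 : Int) + 1) := by
        rw [← hMp, ← hMq, heq]
      exact hsnd_inj p hp q hq (by omega)
  have hsubset : ∀ t ∈ L0.map tf, t ∈ ML := by
    intro t ht
    obtain ⟨p, hp, rfl⟩ := List.mem_map.mp ht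
    rw [hML]
    rw [htf]
    simp only
    by_cases hpn : Df ((p.1 : Int) + 1) = none
    · rw [if_pos hpn]
      obtain ⟨hMne, hb1', hb2'⟩ := (hfact p hp).1 hpn
      exact List.mem_filter.mpr ⟨by rw [PySem.List.mem_pyRange_one]; omega, by simpa using hMne⟩
    · rw [if_neg hpn]
      obtain ⟨hMu0, _, hMM, hc1, hc2⟩ := (hfact p hp).2 hpn
      refine List.mem_filter.mpr ⟨by rw [PySem.List.mem_pyRange_one]; omega, ?_⟩
      simp only [decide_eq_true_eq]
      rw [hMM]
      obtain ⟨hpc, hph, _⟩ := hkey p hp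
      omega
  have hlen2 : (L0.map tf).length ≤ ML.length :=
    (List.subperm_of_subset htnd hsubset).length_le
  have hMLlen : ML.length = pvMCnt n Mf := by
    unfold pvMCnt
    rw [List.countP_eq_length_filter]
  rw [hres]
  have : (L0.map tf).length = k := by
    rw [List.length_map, hL0len, hlen]
  omega

-- ---------- B side ----------

theorem pvInsertDesc_perm (x : Int) (l : List Int) : (pvInsertDesc x l).Perm (x :: l) := by
  induction l with
  | nil => simp [pvInsertDesc]
  | cons y ys ih =>
    simp only [pvInsertDesc]
    split
    · exact (ih.cons y).trans (List.Perm.swap x y ys)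
    · exact List.Perm.refl _

theorem pvInsertDesc_pairwise {x : Int} {l : List Int}
    (h : l.Pairwise (fun a b => b ≤ a)) : (pvInsertDesc x l).Pairwise (fun a b => b ≤ a) := by
  induction l with
  | nil => simp [pvInsertDesc]
  | cons y ys ih =>
    rw [List.pairwise_cons] at h
    simp only [pvInsertDesc]
    split
    · rename_i hyx
      rw [List.pairwise_cons]
      refine ⟨fun b hb => ?_, ih h.2⟩
      have := (pvInsertDesc_perm x ys).mem_iff.mp hb
      rcases List.mem_cons.mp this with rfl | hb'
      · omega
      · exact h.1 b hb'
    · rename_i hyx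
      rw [List.pairwise_cons]
      refine ⟨fun b hb => ?_, List.pairwise_cons.mpr h⟩
      rcases List.mem_cons.mp hb with rfl | hb'
      · omega
      · exact le_trans (h.1 b hb') (by omega)

theorem pvActivate_spec (a : Int) : ∀ (hs : List (Int × Int)) (prices : List Int),
    hs.Pairwise (fun x y => y.1 ≤ x.1) → prices.Pairwise (fun x y => y ≤ x) →
    ∃ pre, hs = pre ++ (pvActivate a hs prices).1
      ∧ (∀ h ∈ pre, a < h.1)
      ∧ (∀ h ∈ (pvActivate a hs prices).1, h.1 ≤ a)
      ∧ ((pvActivate a hs prices).2).Perm (prices ++ pre.map Prod.snd)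
      ∧ ((pvActivate a hs prices).2).Pairwise (fun x y => y ≤ x)
      ∧ ((pvActivate a hs prices).1).Pairwise (fun x y => y.1 ≤ x.1) := by
  intro hs
  induction hs with
  | nil =>
    intro prices _ hp
    exact ⟨[], by simp [pvActivate], by simp, by simp [pvActivate], by simp [pvActivate], by simp [pvActivate, hp], by simp [pvActivate]⟩
  | cons h t ih =>
    intro prices hhs hp
    rw [List.pairwise_cons] at hhs
    by_cases hcmp : h.1 > a
    · have hact : pvActivate a (h :: t) prices = pvActivate a t (pvInsertDesc h.2 prices) := by
        simp [pvActivate, hcmp]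
      obtain ⟨pre', h1, h2, h3, h4, h5, h6⟩ := ih (pvInsertDesc h.2 prices) hhs.2 (pvInsertDesc_pairwise hp)
      refine ⟨h :: pre', ?_, ?_, ?_, ?_, ?_, ?_⟩
      · rw [hact]; simpa using h1
      · intro x hx; rcases List.mem_cons.mp hx with rfl | hx
        · exact hcmp
        · exact h2 x hx
      · rw [hact]; exact h3
      · rw [hact]
        refine h4.trans ?_
        refine (((pvInsertDesc_perm h.2 prices).append_right _).trans ?_)
        simpa using List.perm_middle.symm
      · rw [hact]; exact h5
      · rw [hact]; exact h6
    · have hact : pvActivate a (h :: t) prices = (h :: t, prices) := by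
        simp [pvActivate, hcmp]
      refine ⟨[], by simp [hact], by simp, ?_, by simp [hact], by simp [hact, hp], by rw [hact, List.pairwise_cons]; exact hhs⟩
      intro x hx
      rw [hact] at hx
      rcases List.mem_cons.mp hx with rfl | hx
      · omega
      · exact le_trans (hhs.1 x hx) (by omega)

theorem pvTakeLE_none {p : Int} : ∀ {l : List Int}, pvTakeLE p l = none → ∀ x ∈ l, p < x := by
  intro l
  induction l with
  | nil => simp
  | cons y ys ih =>
    intro hnone x hx
    simp only [pvTakeLE] at hnone
    split at hnone
    · rcases List.mem_cons.mp hx with rfl | hx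
      · assumption
      · exact ih (by simpa using hnone) x hx
    · simp at hnone

theorem pvTakeLE_some {p : Int} : ∀ {l l' : List Int}, pvTakeLE p l = some l' →
    ∃ pre g suf, l = pre ++ g :: suf ∧ l' = pre ++ suf ∧ (∀ x ∈ pre, p < x) ∧ g ≤ p := by
  intro l
  induction l with
  | nil => simp [pvTakeLE]
  | cons y ys ih =>
    intro l' hsome
    simp only [pvTakeLE] at hsome
    split at hsome
    · rename_i hyp
      rcases Option.map_eq_some_iff.mp hsome with ⟨l'', h1, rfl⟩
      obtain ⟨pre, g, suf, rfl, rfl, h4, h5⟩ := ih h1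
      exact ⟨y :: pre, g, suf, rfl, rfl, fun x hx => by
        rcases List.mem_cons.mp hx with rfl | hx; exact hyp; exact h4 x hx, h5⟩
    · rename_i hyp
      exact ⟨[], y, ys, by simp, by simpa using hsome.symm, by simp, by omega⟩

theorem pvGreedy_acc : ∀ (cs hs : List (Int × Int)) (prices : List Int) (acc : Int),
    pvGreedy cs hs prices acc = pvGreedy cs hs prices 0 + acc := by
  intro cs
  induction cs with
  | nil => intro hs prices acc; simp [pvGreedy]
  | cons c cs ih =>
    intro hs prices acc
    simp only [pvGreedy]
    rcases htake : pvTakeLE c.2 (pvActivate c.1 hs prices).2 with _ | prices'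
    · simp only []
      rw [ih _ _ acc]
    · simp only []
      rw [ih _ _ (acc + 1), ih _ _ (0 + 1)]
      ring

theorem pv_subperm_cons_of_not_mem {α : Type} [DecidableEq α] {l l₂ : List α} {a : α}
    (h : List.Subperm l (a :: l₂)) (hc : a ∉ l) : List.Subperm l l₂ := by
  rw [List.subperm_ext_iff] at h ⊢
  intro x hx
  have hxa : x ≠ a := fun h' => hc (h' ▸ hx)
  have h2 := h x hx
  rwa [List.count_cons_of_ne hxa.symm] at h2

theorem pvGreedy_ach : ∀ (cs hs act : List (Int × Int)) (prices : List Int),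
    cs.Pairwise (fun x y => y.1 ≤ x.1) → hs.Pairwise (fun x y => y.1 ≤ x.1) →
    prices.Pairwise (fun x y => y ≤ x) →
    (act.map Prod.snd).Perm prices → (∀ h ∈ act, ∀ c ∈ cs, c.1 < h.1) →
    ∃ k : Nat, pvGreedy cs hs prices 0 = (k : Int) ∧
      ∃ P : List ((Int × Int) × (Int × Int)), P.length = k ∧
        List.Subperm (P.map Prod.fst) cs ∧ List.Subperm (P.map Prod.snd) (act ++ hs) ∧
        ∀ q ∈ P, pvCompat q.1 q.2 := by
  intro cs
  induction cs with
  | nil =>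
    intro hs act prices _ _ _ _ _
    exact ⟨0, by simp [pvGreedy], [], by simp, by simp, by simp, by simp⟩
  | cons c cs ih =>
    intro hs act prices hcs hhs hps hperm harea
    rw [List.pairwise_cons] at hcs
    obtain ⟨pre, hsplit, hpre, hrest, hp2perm, hp2sort, hrestsort⟩ := pvActivate_spec c.1 hs prices hhs hps
    set s := pvActivate c.1 hs prices with hs_def
    have hactperm : ((act ++ pre).map Prod.snd).Perm s.2 := by
      rw [List.map_append]
      exact ((hperm.append_right _).trans hp2perm.symm)
    have hareas' : ∀ h ∈ act ++ pre, ∀ c' ∈ cs, c'.1 < h.1 := by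
      intro h hh c' hc'
      rcases List.mem_append.mp hh with hh | hh
      · exact harea h hh c' (List.mem_cons_of_mem _ hc')
      · exact lt_of_le_of_lt (hcs.1 c' hc') (hpre h hh)
    have havail : ((act ++ pre) ++ s.1).Perm (act ++ hs) := by
      rw [hsplit, List.append_assoc]
    rcases htake : pvTakeLE c.2 s.2 with _ | prices'
    · obtain ⟨k, hk, P, hlen, hfst, hsnd, hcompat⟩ := ih s.1 (act ++ pre) s.2 hcs.2 hrestsort hp2sort hactperm hareas'
      refine ⟨k, ?_, P, hlen, hfst.trans (List.sublist_cons_self c cs).subperm, hsnd.trans havail.subperm, hcompat⟩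
      simp only [pvGreedy, ← hs_def, htake]
      exact hk
    · obtain ⟨pre₂, g, suf, hdec, hdec', hpre₂, hgle⟩ := pvTakeLE_some htake
      have hg_mem : g ∈ s.2 := by rw [hdec]; exact List.mem_append_right _ (List.mem_cons_self)
      obtain ⟨hg, hghmem, hgh2⟩ := List.mem_map.mp (hactperm.mem_iff.mpr hg_mem)
      have hprices'_sort : prices'.Pairwise (fun x y => y ≤ x) := by
        rw [hdec']
        exact (hp2sort.sublist (by rw [hdec]; exact (List.sublist_cons_self g suf).append_left pre₂))
      have herase_perm : (((act ++ pre).erase hg).map Prod.snd).Perm prices' := by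
        have h1 : (act ++ pre).Perm (hg :: (act ++ pre).erase hg) := List.perm_cons_erase hghmem
        have h2 : ((act ++ pre).map Prod.snd).Perm (hg.2 :: ((act ++ pre).erase hg).map Prod.snd) := by
          simpa using h1.map Prod.snd
        have h3 : s.2.Perm (g :: prices') := by
          rw [hdec, hdec']
          exact List.perm_middle
        have h4 := (h2.symm.trans hactperm).trans h3
        rw [hgh2] at h4
        exact h4.cons_inv
      obtain ⟨k, hk, P, hlen, hfst, hsnd, hcompat⟩ := ih s.1 ((act ++ pre).erase hg) prices' hcs.2 hrestsort hprices'_sort herase_perm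
        (fun h hh c' hc' => hareas' h (List.mem_of_mem_erase hh) c' hc')
      have hcompatc : pvCompat c hg := by
        constructor
        · rcases List.mem_append.mp hghmem with hh | hh
          · exact harea hg hh c List.mem_cons_self
          · exact hpre hg hh
        · rw [hgh2]; exact hgle
      refine ⟨k + 1, ?_, (c, hg) :: P, by simp [hlen], ?_, ?_, ?_⟩
      · simp only [pvGreedy, ← hs_def, htake]
        rw [pvGreedy_acc, hk]
        push_cast; ring
      · simpa using (List.subperm_cons c).mpr hfst
      · have h1 : List.Subperm (hg :: P.map Prod.snd) (hg :: ((act ++ pre).erase hg ++ s.1)) :=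
          (List.subperm_cons hg).mpr hsnd
        have h2 : (hg :: ((act ++ pre).erase hg ++ s.1)).Perm ((act ++ pre) ++ s.1) := by
          simpa using (List.perm_cons_erase hghmem).symm.append_right s.1
        simpa using h1.trans (h2.subperm.trans havail.subperm)
      · intro q hq
        rcases List.mem_cons.mp hq with rfl | hq
        · exact hcompatc
        · exact hcompat q hq

theorem pvGreedy_max : ∀ (cs hs act : List (Int × Int)) (prices : List Int),
    cs.Pairwise (fun x y => y.1 ≤ x.1) → hs.Pairwise (fun x y => y.1 ≤ x.1) →
    prices.Pairwise (fun x y => y ≤ x) →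
    (act.map Prod.snd).Perm prices → (∀ h ∈ act, ∀ c ∈ cs, c.1 < h.1) →
    ∀ P : List ((Int × Int) × (Int × Int)),
      List.Subperm (P.map Prod.fst) cs → List.Subperm (P.map Prod.snd) (act ++ hs) →
      (∀ q ∈ P, pvCompat q.1 q.2) → (P.length : Int) ≤ pvGreedy cs hs prices 0 := by
  intro cs
  induction cs with
  | nil =>
    intro hs act prices _ _ _ _ _ P hfst _ _
    have h0 := hfst.length_le
    simp only [List.length_map, List.length_nil, Nat.le_zero] at h0
    simp [pvGreedy, h0]
  | cons c cs ih =>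
    intro hs act prices hcs hhs hps hperm harea P hfst hsnd hcompat
    rw [List.pairwise_cons] at hcs
    obtain ⟨pre, hsplit, hpre, hrest, hp2perm, hp2sort, hrestsort⟩ := pvActivate_spec c.1 hs prices hhs hps
    set s := pvActivate c.1 hs prices with hs_def
    have hactperm : ((act ++ pre).map Prod.snd).Perm s.2 := by
      rw [List.map_append]; exact ((hperm.append_right _).trans hp2perm.symm)
    have hareas' : ∀ h ∈ act ++ pre, ∀ c' ∈ cs, c'.1 < h.1 := by
      intro h hh c' hc'
      rcases List.mem_append.mp hh with hh | hh
      · exact harea h hh c' (List.mem_cons_of_mem _ hc')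
      · exact lt_of_le_of_lt (hcs.1 c' hc') (hpre h hh)
    have havail : ((act ++ pre) ++ s.1).Perm (act ++ hs) := by rw [hsplit, List.append_assoc]
    have hsndA : List.Subperm (P.map Prod.snd) ((act ++ pre) ++ s.1) := hsnd.trans havail.symm.subperm
    have hOnlyAct : ∀ q ∈ P, c.1 < q.2.1 → q.2 ∈ act ++ pre := by
      intro q hq hlt
      have hmem : q.2 ∈ (act ++ pre) ++ s.1 := hsndA.subset (List.mem_map_of_mem hq)
      rcases List.mem_append.mp hmem with h | h
      · exact h
      · exact absurd (hrest _ h) (by omega)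
    have hfstmem : ∀ q ∈ P, q.1 = c ∨ q.1 ∈ cs := fun q hq =>
      List.mem_cons.mp (hfst.subset (List.mem_map_of_mem hq))
    rcases htake : pvTakeLE c.2 s.2 with _ | prices'
    · have hnone := pvTakeLE_none htake
      have hnc : ∀ q ∈ P, q.1 ≠ c := by
        intro q hq hqc
        have hcpt := hcompat q hq
        rw [hqc] at hcpt
        have hmem := hOnlyAct q hq hcpt.1
        have hin : q.2.2 ∈ s.2 := hactperm.mem_iff.mp (List.mem_map_of_mem hmem)
        have := hnone _ hin
        have := hcpt.2
        omega
      have hfst' : List.Subperm (P.map Prod.fst) cs := pv_subperm_cons_of_not_mem hfst (by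
        intro hmem
        obtain ⟨q, hq, hqc⟩ := List.mem_map.mp hmem
        exact hnc q hq hqc)
      simp only [pvGreedy, ← hs_def, htake]
      exact ih s.1 (act ++ pre) s.2 hcs.2 hrestsort hp2sort hactperm hareas' P hfst' hsndA hcompat
    · obtain ⟨pre₂, g, suf, hdec, hdec', hpre₂, hgle⟩ := pvTakeLE_some htake
      have hg_mem : g ∈ s.2 := by rw [hdec]; exact List.mem_append_right _ List.mem_cons_self
      obtain ⟨hg, hghmem, hgh2⟩ := List.mem_map.mp (hactperm.mem_iff.mpr hg_mem)
      have hprices'_sort : prices'.Pairwise (fun x y => y ≤ x) := by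
        rw [hdec']
        exact (hp2sort.sublist (by rw [hdec]; exact (List.sublist_cons_self g suf).append_left pre₂))
      have herase_perm : (((act ++ pre).erase hg).map Prod.snd).Perm prices' := by
        have h1 : (act ++ pre).Perm (hg :: (act ++ pre).erase hg) := List.perm_cons_erase hghmem
        have h2 : ((act ++ pre).map Prod.snd).Perm (hg.2 :: ((act ++ pre).erase hg).map Prod.snd) := by
          simpa using h1.map Prod.snd
        have h3 : s.2.Perm (g :: prices') := by
          rw [hdec, hdec']
          exact List.perm_middle
        have h4 := (h2.symm.trans hactperm).trans h3
        rw [hgh2] at h4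
        exact h4.cons_inv
      have hareas'' : ∀ h ∈ (act ++ pre).erase hg, ∀ c' ∈ cs, c'.1 < h.1 :=
        fun h hh => hareas' h (List.mem_of_mem_erase hh)
      have hmax : ∀ x ∈ s.2, x ≤ c.2 → x ≤ g := by
        intro x hx hxle
        rw [hdec] at hx
        rcases List.mem_append.mp hx with hx | hx
        · have := hpre₂ x hx; omega
        · rcases List.mem_cons.mp hx with rfl | hx
          · exact le_refl x
          · have hpw : (pre₂ ++ g :: suf).Pairwise (fun x y => y ≤ x) := hdec ▸ hp2sort
            exact (List.pairwise_cons.mp (List.pairwise_append.mp hpw).2.1).1 x hx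
      have hcancel : ((act ++ pre) ++ s.1).Perm (hg :: ((act ++ pre).erase hg ++ s.1)) := by
        simpa using (List.perm_cons_erase hghmem).append_right s.1
      have IH := ih s.1 ((act ++ pre).erase hg) prices' hcs.2 hrestsort hprices'_sort herase_perm hareas''
      have hgoal : pvGreedy (c :: cs) hs prices 0 = pvGreedy cs s.1 prices' 0 + 1 := by
        simp only [pvGreedy, ← hs_def, htake]
        rw [pvGreedy_acc]
        ring
      rw [hgoal]
      by_cases hcu : ∃ q ∈ P, q.1 = c
      · obtain ⟨q₀, hq₀P, hq₀c⟩ := hcu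
        have hPp : P.Perm (q₀ :: P.erase q₀) := List.perm_cons_erase hq₀P
        have hcpt₀ := hcompat q₀ hq₀P
        rw [hq₀c] at hcpt₀
        have h₀act : q₀.2 ∈ act ++ pre := hOnlyAct q₀ hq₀P hcpt₀.1
        have h₀le : q₀.2.2 ≤ g := hmax _ (hactperm.mem_iff.mp (List.mem_map_of_mem h₀act)) hcpt₀.2
        by_cases hgu : ∃ q ∈ P.erase q₀, q.2 = hg
        · obtain ⟨q₁, hq₁, hq₁hg⟩ := hgu
          have hq₁P : q₁ ∈ P := List.mem_of_mem_erase hq₁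
          have hPp2 : (P.erase q₀).Perm (q₁ :: (P.erase q₀).erase q₁) := List.perm_cons_erase hq₁
          have hPfull : P.Perm (q₀ :: q₁ :: (P.erase q₀).erase q₁) := hPp.trans (hPp2.cons q₀)
          have hlenP : P.length = ((q₁.1, q₀.2) :: (P.erase q₀).erase q₁).length + 1 := by
            simpa using hPfull.length_eq
          have hfst1 : (P.map Prod.fst).Perm (c :: ((q₁.1, q₀.2) :: (P.erase q₀).erase q₁).map Prod.fst) := by
            simpa [hq₀c] using hPfull.map Prod.fst
          have hfst' : List.Subperm (((q₁.1, q₀.2) :: (P.erase q₀).erase q₁).map Prod.fst) cs :=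
            (List.subperm_cons c).mp ((hfst1.symm).subperm.trans hfst)
          have hsnd1 : (hg :: ((q₁.1, q₀.2) :: (P.erase q₀).erase q₁).map Prod.snd).Perm (P.map Prod.snd) := by
            have h1 : (P.map Prod.snd).Perm (q₀.2 :: hg :: ((P.erase q₀).erase q₁).map Prod.snd) := by
              simpa [hq₁hg] using hPfull.map Prod.snd
            exact (List.Perm.swap q₀.2 hg _).trans h1.symm
          have hsnd2 : List.Subperm (((q₁.1, q₀.2) :: (P.erase q₀).erase q₁).map Prod.snd)
              ((act ++ pre).erase hg ++ s.1) :=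
            (List.subperm_cons hg).mp ((hsnd1.subperm.trans hsndA).trans hcancel.subperm)
          have hcompat' : ∀ q ∈ (q₁.1, q₀.2) :: (P.erase q₀).erase q₁, pvCompat q.1 q.2 := by
            intro q hq
            rcases List.mem_cons.mp hq with rfl | hq
            · constructor
              · rcases hfstmem q₁ hq₁P with h | h
                · rw [h]; exact hcpt₀.1
                · exact lt_of_le_of_lt (hcs.1 _ h) hcpt₀.1
              · have hc₁ := hcompat q₁ hq₁P
                rw [hq₁hg] at hc₁
                exact le_trans h₀le (by rw [← hgh2]; exact hc₁.2)
            · exact hcompat q (List.mem_of_mem_erase (List.mem_of_mem_erase hq))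
          have hIH := IH _ hfst' hsnd2 hcompat'
          rw [hlenP]
          push_cast
          omega
        · push Not at hgu
          have hlenP : P.length = (P.erase q₀).length + 1 := by simpa using hPp.length_eq
          have hfst1 : (P.map Prod.fst).Perm (c :: (P.erase q₀).map Prod.fst) := by
            simpa [hq₀c] using hPp.map Prod.fst
          have hfst' : List.Subperm ((P.erase q₀).map Prod.fst) cs :=
            (List.subperm_cons c).mp ((hfst1.symm).subperm.trans hfst)
          have hsnd2 : List.Subperm ((P.erase q₀).map Prod.snd) ((act ++ pre).erase hg ++ s.1) := by
            rw [List.subperm_ext_iff]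
            intro x hx
            obtain ⟨q, hq, rfl⟩ := List.mem_map.mp hx
            have hcount1 : ((P.erase q₀).map Prod.snd).count q.2 ≤ (P.map Prod.snd).count q.2 :=
              ((List.erase_sublist).map Prod.snd).count_le _
            have hcount2 := hsndA.count_le q.2
            have hcount3 := hcancel.count_eq q.2
            rw [List.count_cons_of_ne (hgu q hq).symm] at hcount3
            omega
          have hIH := IH _ hfst' hsnd2 (fun q hq => hcompat q (List.mem_of_mem_erase hq))
          rw [hlenP]
          push_cast
          omega
      · push Not at hcu
        have hfst' : List.Subperm (P.map Prod.fst) cs := pv_subperm_cons_of_not_mem hfst (by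
          intro hmem
          obtain ⟨q, hq, hqc⟩ := List.mem_map.mp hmem
          exact hcu q hq hqc)
        by_cases hgu : ∃ q ∈ P, q.2 = hg
        · obtain ⟨q₁, hq₁P, hq₁hg⟩ := hgu
          have hPp : P.Perm (q₁ :: P.erase q₁) := List.perm_cons_erase hq₁P
          have hlenP : P.length = (P.erase q₁).length + 1 := by simpa using hPp.length_eq
          have hfst'' : List.Subperm ((P.erase q₁).map Prod.fst) cs :=
            ((List.erase_sublist).map Prod.fst).subperm.trans hfst'
          have hsnd1 : (hg :: (P.erase q₁).map Prod.snd).Perm (P.map Prod.snd) := by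
            simpa [hq₁hg] using (hPp.map Prod.snd).symm
          have hsnd2 : List.Subperm ((P.erase q₁).map Prod.snd) ((act ++ pre).erase hg ++ s.1) :=
            (List.subperm_cons hg).mp ((hsnd1.subperm.trans hsndA).trans hcancel.subperm)
          have hIH := IH _ hfst'' hsnd2 (fun q hq => hcompat q (List.mem_of_mem_erase hq))
          rw [hlenP]
          push_cast
          omega
        · push Not at hgu
          have hsnd2 : List.Subperm (P.map Prod.snd) ((act ++ pre).erase hg ++ s.1) := by
            rw [List.subperm_ext_iff]
            intro x hx
            obtain ⟨q, hq, rfl⟩ := List.mem_map.mp hx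
            have hcount2 := hsndA.count_le q.2
            have hcount3 := hcancel.count_eq q.2
            rw [List.count_cons_of_ne (hgu q hq).symm] at hcount3
            omega
          have hIH := IH _ hfst' hsnd2 hcompat
          omega

theorem pvB_ach (cl hs : List (Int × Int)) :
    ∃ k : Nat, real_estate_broker_alt cl hs = (k : Int) ∧ pvM cl hs k := by
  obtain ⟨k, hk, P, hlen, hfst, hsnd, hcompat⟩ :=
    pvGreedy_ach (PySem.List.sorted cl (fun c => c.1) true) (PySem.List.sorted hs (fun h => h.1) true)
      [] [] (PySem.List.sorted_pairwise_rev cl _) (PySem.List.sorted_pairwise_rev hs _)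
      (by simp) (by simp) (by simp)
  refine ⟨k, hk, P, hlen, hfst.trans (PySem.List.sorted_perm cl _ true).subperm, ?_, hcompat⟩
  simpa using hsnd.trans (PySem.List.sorted_perm hs _ true).subperm

theorem pvB_max (cl hs : List (Int × Int)) (k : Nat) (h : pvM cl hs k) :
    (k : Int) ≤ real_estate_broker_alt cl hs := by
  obtain ⟨P, hlen, hfst, hsnd, hcompat⟩ := h
  have := pvGreedy_max (PySem.List.sorted cl (fun c => c.1) true) (PySem.List.sorted hs (fun h => h.1) true)
      [] [] (PySem.List.sorted_pairwise_rev cl _) (PySem.List.sorted_pairwise_rev hs _)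
      (by simp) (by simp) (by simp) P
      (hfst.trans (PySem.List.sorted_perm cl _ true).symm.subperm)
      (by simpa using hsnd.trans (PySem.List.sorted_perm hs _ true).symm.subperm)
      hcompat
  rw [hlen] at this
  exact this

theorem pv_main (clients houses : List (Int × Int)) :
    real_estate_broker clients houses = real_estate_broker_alt clients houses := by
  obtain ⟨ka, hka, hma⟩ := pvA_ach clients houses
  obtain ⟨kb, hkb, hmb⟩ := pvB_ach clients houses
  have h1 := pvB_max clients houses ka hma
  have h2 := pvA_max clients houses kb hmb
  omega

-- ===== VERDICT (by name: the statement is the Claim_ definition above) =====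
theorem real_estate_broker_spec : Claim_equal_real_estate_broker := by
  intro clients houses _
  unfold Spec_real_estate_broker
  exact pv_main clients houses
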